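-- pv_equiv track=rewrite | github.com/grapheneaffiliate/h4-polytopic-attention | solve_arc_b19.py | solve_bb43febb
-- ===== SOURCE A (Python) =====
-- def solve_bb43febb(grid):
--     grid = [row[:] for row in grid]
--     rows, cols = len(grid), len(grid[0])
--     visited = [[False]*cols for _ in range(rows)]
--
--     def find_rect(r, c):
--         from collections import deque
--         q = deque([(r, c)])
--         visited[r][c] = True
--         cells = [(r, c)]
--         while q:
--             cr, cc = q.popleft()
--             for dr, dc in [(-1,0),(1,0),(0,-1),(0,1)]:
--                 nr, nc = cr+dr, cc+dc
--                 if 0 <= nr < rows and 0 <= nc < cols and not visited[nr][nc] and grid[nr][nc] == 5: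
--                     visited[nr][nc] = True
--                     q.append((nr, nc))
--                     cells.append((nr, nc))
--         min_r = min(x[0] for x in cells)
--         max_r = max(x[0] for x in cells)
--         min_c = min(x[1] for x in cells)
--         max_c = max(x[1] for x in cells)
--         return min_r, max_r, min_c, max_c
--
--     output = [row[:] for row in grid]
--     for r in range(rows):
--         for c in range(cols):
--             if grid[r][c] == 5 and not visited[r][c]:
--                 r1, r2, c1, c2 = find_rect(r, c)
--                 for ir in range(r1+1, r2):
--                     for ic in range(c1+1, c2):
--                         output[ir][ic] = 2
--     return output
-- ===== SOURCE B (Python) =====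
-- def solve_bb43febb(grid):
--     rows, cols = len(grid), len(grid[0])
--     parent = {}
--
--     def find(p):
--         while parent.get(p, p) != p:
--             p = parent[p]
--         return p
--
--     for r in range(rows):
--         for c in range(cols):
--             if grid[r][c] == 5:
--                 for nr, nc in ((r, c + 1), (r + 1, c)):
--                     if nr < rows and nc < cols and grid[nr][nc] == 5:
--                         ra, rb = find((r, c)), find((nr, nc))
--                         if ra != rb:
--                             lo, hi = (ra, rb) if ra < rb else (rb, ra)
--                             parent[hi] = lo
--     boxes = {}
--     for r in range(rows):
--         for c in range(cols):
--             if grid[r][c] == 5: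
--                 root = find((r, c))
--                 if root in boxes:
--                     r1, r2, c1, c2 = boxes[root]
--                     boxes[root] = (min(r1, r), max(r2, r), min(c1, c), max(c2, c))
--                 else:
--                     boxes[root] = (r, r, c, c)
--     output = [row[:] for row in grid]
--     for r1, r2, c1, c2 in boxes.values():
--         for ir in range(r1 + 1, r2):
--             for ic in range(c1 + 1, c2):
--                 output[ir][ic] = 2
--     return output
-- ===== Notes on version B (the rewrite author's own statement) =====
-- stated objective: alternative
-- what changed: Replaces A's per-component BFS flood fill (deque + visited matrix + collect-cells-then-min/max) by a union-find pass: one scan unions every 5-cell with its right/down 5-neighbours under a parent forest, a second scan groups cells by find(root) into a dict of running bounding boxes, and a final pass fills each box interior with 2.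
import Mathlib
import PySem

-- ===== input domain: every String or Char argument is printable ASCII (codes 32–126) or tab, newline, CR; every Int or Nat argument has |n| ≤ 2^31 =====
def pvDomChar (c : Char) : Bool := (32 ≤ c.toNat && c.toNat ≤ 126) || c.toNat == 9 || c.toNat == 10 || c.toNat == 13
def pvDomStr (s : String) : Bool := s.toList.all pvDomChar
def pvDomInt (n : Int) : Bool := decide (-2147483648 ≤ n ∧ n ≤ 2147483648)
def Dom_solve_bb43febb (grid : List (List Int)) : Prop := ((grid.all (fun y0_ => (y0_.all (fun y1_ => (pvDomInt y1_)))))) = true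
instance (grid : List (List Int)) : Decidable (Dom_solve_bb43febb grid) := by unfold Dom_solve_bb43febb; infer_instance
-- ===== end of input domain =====

-- B replaces A's per-component BFS flood fill by union-find: one scan unions each 5-cell
-- with its right/down 5-neighbours, a second scan groups cells by root into bounding
-- boxes, a third pass fills the box interiors; proved to return A's grid on every
-- non-raising input.

-- ===== PORT A =====

-- grid[r][c]: every use below is behind 0 ≤ r < rows / 0 ≤ c < cols guards, where Pre_
-- (row 0 no longer than any row) makes the access in range, so the total pyGetD is exact.
def pvCell (g : List (List Int)) (r c : Int) : Int :=
  PySem.List.pyGetD (PySem.List.pyGetD g r []) c 0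

-- visited[r][c] (same guarded-access remark)
def pvBGet (v : List (List Bool)) (r c : Int) : Bool :=
  PySem.List.pyGetD (PySem.List.pyGetD v r []) c false

-- visited[r][c] = True
def pvBSet (v : List (List Bool)) (r c : Int) : List (List Bool) :=
  PySem.List.pySetD v r (PySem.List.pySetD (PySem.List.pyGetD v r []) c true)

-- output[r][c] = x
def pvSetCell (m : List (List Int)) (r c x : Int) : List (List Int) :=
  PySem.List.pySetD m r (PySem.List.pySetD (PySem.List.pyGetD m r []) c x)

-- 'for ir in range(r1+1, r2): for ic in range(c1+1, c2): output[ir][ic] = 2'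
-- (these two loops are the same source lines in A and in B, hence one shared helper)
def pvFillBox (out : List (List Int)) (r1 r2 c1 c2 : Int) : List (List Int) :=
  (PySem.List.pyRange (r1 + 1) r2 1).foldl (fun o ir =>
    (PySem.List.pyRange (c1 + 1) c2 1).foldl (fun o2 ic => pvSetCell o2 ir ic 2) o) out

-- [(-1,0),(1,0),(0,-1),(0,1)]
def pvDirs : List (Int × Int) := [(-1, 0), (1, 0), (0, -1), (0, 1)]

-- the body of A's 'for dr, dc in [...]' over state (visited, q, cells)
def pvBfsStep (g : List (List Int)) (rows cols cr cc : Int)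
    (st : List (List Bool) × List (Int × Int) × List (Int × Int)) (d : Int × Int) :
    List (List Bool) × List (Int × Int) × List (Int × Int) :=
  let nr := cr + d.1
  let nc := cc + d.2
  if 0 ≤ nr ∧ nr < rows ∧ 0 ≤ nc ∧ nc < cols ∧ pvBGet st.1 nr nc = false ∧ pvCell g nr nc = 5 then
    (pvBSet st.1 nr nc, st.2.1 ++ [(nr, nc)], st.2.2 ++ [(nr, nc)])
  else st

-- A's 'while q' (deque: popleft = head, append = back); the fuel only makes the recursion
-- structural — solve_bb43febb supplies more fuel than the loop can ever consume
def pvBfsLoop (g : List (List Int)) (rows cols : Int) :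
    Nat → List (List Bool) → List (Int × Int) → List (Int × Int) →
    List (List Bool) × List (Int × Int)
  | 0, v, _, cells => (v, cells)
  | _ + 1, v, [], cells => (v, cells)
  | fuel + 1, v, (cr, cc) :: rest, cells =>
      let st := pvDirs.foldl (pvBfsStep g rows cols cr cc) (v, rest, cells)
      pvBfsLoop g rows cols fuel st.1 st.2.1 st.2.2

-- find_rect(r, c): returns the updated visited matrix and (min_r, max_r, min_c, max_c);
-- cells is nonempty (it holds (r, c)), so Python's min/max never raise and .getD 0 is exact
def pvFindRect (g : List (List Int)) (rows cols r c : Int) (v : List (List Bool)) :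
    List (List Bool) × Int × Int × Int × Int :=
  let v1 := pvBSet v r c
  let res := pvBfsLoop g rows cols ((rows * cols).toNat + 1) v1 [(r, c)] [(r, c)]
  let cells := res.2
  ((res.1,
    (PySem.List.min? (cells.map Prod.fst) id).getD 0,
    (PySem.List.max? (cells.map Prod.fst) id).getD 0,
    (PySem.List.min? (cells.map Prod.snd) id).getD 0,
    (PySem.List.max? (cells.map Prod.snd) id).getD 0) :
    List (List Bool) × Int × Int × Int × Int)

def solve_bb43febb (grid : List (List Int)) : List (List Int) :=
  let g := grid.map (fun row => row)          -- grid = [row[:] for row in grid]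
  let rows := PySem.List.len g
  let cols := PySem.List.len (PySem.List.pyGetD g 0 [])   -- len(grid[0]); raises on [] (outside Pre_)
  let visited := (PySem.List.pyRange 0 rows 1).map (fun _ => List.replicate cols.toNat false)
  let output := g.map (fun row => row)        -- output = [row[:] for row in grid]
  let res := (PySem.List.pyRange 0 rows 1).foldl (fun (st : List (List Bool) × List (List Int)) r =>
      (PySem.List.pyRange 0 cols 1).foldl (fun st c =>
        if pvCell g r c = 5 ∧ pvBGet st.1 r c = false then
          let fr := pvFindRect g rows cols r c st.1
          (fr.1, pvFillBox st.2 fr.2.1 fr.2.2.1 fr.2.2.2.1 fr.2.2.2.2)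
        else st) st) (visited, output)
  res.2

-- ===== PORT B =====

-- Python's tuple comparison 'ra < rb' on pairs (lexicographic)
def pvLexLtB (a b : Int × Int) : Bool := a.1 < b.1 || (a.1 == b.1 && a.2 < b.2)

-- find(p): 'while parent.get(p, p) != p: p = parent[p]'; the fuel only makes the loop
-- structural — solve_bb43febb_alt supplies more fuel than any parent chain can consume
def pvFind (parent : PySem.Dict (Int × Int) (Int × Int)) : Nat → Int × Int → Int × Int
  | 0, p => p
  | fuel + 1, p =>
      let q := PySem.Dict.getD parent p p
      if q ≠ p then pvFind parent fuel q else p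

-- body of B's 'for nr, nc in ((r, c + 1), (r + 1, c)):'
def pvUnionStep (g : List (List Int)) (rows cols : Int) (fuel : Nat) (r c : Int)
    (parent : PySem.Dict (Int × Int) (Int × Int)) (n : Int × Int) :
    PySem.Dict (Int × Int) (Int × Int) :=
  if n.1 < rows ∧ n.2 < cols ∧ pvCell g n.1 n.2 = 5 then
    let ra := pvFind parent fuel (r, c)
    let rb := pvFind parent fuel n
    if ra ≠ rb then
      let lo := if pvLexLtB ra rb then ra else rb
      let hi := if pvLexLtB ra rb then rb else ra
      PySem.Dict.insert parent hi lo
    else parent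
  else parent

-- body of B's grouping loop: 'root = find((r, c)); boxes[root] = ...'
def pvBoxStep (g : List (List Int)) (fuel : Nat)
    (parent : PySem.Dict (Int × Int) (Int × Int))
    (bx : PySem.Dict (Int × Int) (Int × Int × Int × Int)) (r c : Int) :
    PySem.Dict (Int × Int) (Int × Int × Int × Int) :=
  if pvCell g r c = 5 then
    let root := pvFind parent fuel (r, c)
    match PySem.Dict.get? bx root with
    | some (r1, r2, c1, c2) =>
        PySem.Dict.insert bx root (min r1 r, max r2 r, min c1 c, max c2 c)
    | none => PySem.Dict.insert bx root (r, r, c, c)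
  else bx

def solve_bb43febb_alt (grid : List (List Int)) : List (List Int) :=
  let rows := PySem.List.len grid
  let cols := PySem.List.len (PySem.List.pyGetD grid 0 [])   -- len(grid[0]); raises on [] (outside Pre_)
  let fuel := (rows * cols).toNat + 1
  let parent := (PySem.List.pyRange 0 rows 1).foldl (fun par r =>
      (PySem.List.pyRange 0 cols 1).foldl (fun par c =>
        if pvCell grid r c = 5 then
          [((r : Int), c + 1), (r + 1, (c : Int))].foldl (pvUnionStep grid rows cols fuel r c) par
        else par) par) PySem.Dict.empty
  let boxes := (PySem.List.pyRange 0 rows 1).foldl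
      (fun (bx : PySem.Dict (Int × Int) (Int × Int × Int × Int)) r =>
      (PySem.List.pyRange 0 cols 1).foldl (fun bx c =>
        pvBoxStep grid fuel parent bx r c) bx) PySem.Dict.empty
  let output := grid.map (fun row => row)     -- output = [row[:] for row in grid]
  (PySem.Dict.values boxes).foldl (fun out b =>
    pvFillBox out b.1 b.2.1 b.2.2.1 b.2.2.2) output

-- ===== PRECONDITION & SPEC =====

-- Pre_ is exact: A raises IndexError precisely on the empty grid (len(grid[0])) and on grids
-- where some row is shorter than row 0 (the scan reads grid[r][c] for every c < len(grid[0])).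
def Pre_solve_bb43febb (grid : List (List Int)) : Prop :=
  grid ≠ [] ∧ ∀ row ∈ grid, (PySem.List.pyGetD grid 0 []).length ≤ row.length

instance (grid : List (List Int)) : Decidable (Pre_solve_bb43febb grid) := by
  unfold Pre_solve_bb43febb; infer_instance

def pvWitness_solve_bb43febb : List (List Int) :=
  [[5, 5, 5, 0], [5, 0, 5, 0], [5, 5, 5, 0]]

def Spec_solve_bb43febb (grid : List (List Int)) (out : List (List Int)) : Prop :=
  out = solve_bb43febb_alt grid
instance (grid : List (List Int)) (out : List (List Int)) : Decidable (Spec_solve_bb43febb grid out) := by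
  unfold Spec_solve_bb43febb; infer_instance

-- ===== CLAIM (what is proved, stated in full; the proofs are below) =====
def Claim_equal_solve_bb43febb : Prop := ∀ (grid : List (List Int)), Dom_solve_bb43febb grid → Pre_solve_bb43febb grid → Spec_solve_bb43febb grid (solve_bb43febb grid)

-- ===== LEMMAS AND PROOFS =====

-- ---------- abstract layer: 4-neighbour reachability among 5-cells ----------

/-- The four orthogonal neighbours of a cell, in `pvDirs` order. -/
def pvShifts (p : Int × Int) : List (Int × Int) :=
  pvDirs.map (fun d => (p.1 + d.1, p.2 + d.2))

/-- In bounds and carrying value 5 (the cells a flood fill may enter). -/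
def pvGood (g : List (List Int)) (rows cols : Int) (p : Int × Int) : Bool :=
  decide (0 ≤ p.1 ∧ p.1 < rows ∧ 0 ≤ p.2 ∧ p.2 < cols ∧ pvCell g p.1 p.2 = 5)

def pvAdj (g : List (List Int)) (rows cols : Int) (p q : Int × Int) : Prop :=
  q ∈ pvShifts p ∧ pvGood g rows cols q = true

def pvReach (g : List (List Int)) (rows cols : Int) : Int × Int → Int × Int → Prop :=
  Relation.ReflTransGen (pvAdj g rows cols)

def pvUniv (rows cols : Int) : Finset (Int × Int) :=
  (Finset.range rows.toNat ×ˢ Finset.range cols.toNat).image (fun p => ((p.1 : Int), (p.2 : Int)))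

lemma pv_mem_univ {rows cols : Int} {p : Int × Int} :
    p ∈ pvUniv rows cols ↔ 0 ≤ p.1 ∧ p.1 < rows ∧ 0 ≤ p.2 ∧ p.2 < cols := by
  constructor
  · intro hp
    obtain ⟨q, hq, hEq⟩ := Finset.mem_image.mp hp
    obtain ⟨hq1, hq2⟩ := Finset.mem_product.mp hq
    simp only [Finset.mem_range] at hq1 hq2
    subst hEq
    simp only []
    omega
  · intro h
    refine Finset.mem_image.mpr ⟨(p.1.toNat, p.2.toNat), Finset.mem_product.mpr ⟨?_, ?_⟩, ?_⟩
    · simp; omega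
    · simp; omega
    · simp [Prod.ext_iff]; omega

lemma pv_univ_inj :
    Function.Injective (fun p : Nat × Nat => ((p.1 : Int), (p.2 : Int))) := by
  intro a b h
  simp only [Prod.mk.injEq, Int.natCast_inj] at h
  exact Prod.ext_iff.mpr h

lemma pv_card_univ {rows cols : Int} (h1 : 0 ≤ rows) (h2 : 0 ≤ cols) :
    (pvUniv rows cols).card = (rows * cols).toNat := by
  rw [pvUniv, Finset.card_image_of_injective _ pv_univ_inj]
  simp [Finset.card_product]
  exact (Int.toNat_mul h1 h2).symm

lemma pvShifts_nodup (p : Int × Int) : (pvShifts p).Nodup := by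
  simp [pvShifts, pvDirs, Prod.ext_iff]

/-- The generic worklist flood fill A's BFS refines. -/
def pvFlood (g : List (List Int)) (rows cols : Int)
    (push : List (Int × Int) → List (Int × Int) → List (Int × Int)) :
    Nat → Finset (Int × Int) → List (Int × Int) → Finset (Int × Int)
  | 0, V, _ => V
  | _ + 1, V, [] => V
  | fuel + 1, V, x :: rest =>
      let new := (pvShifts x).filter (fun q => pvGood g rows cols q && decide (q ∉ V))
      pvFlood g rows cols push fuel (V ∪ new.toFinset) (push rest new)

lemma pvFlood_main (g : List (List Int)) (rows cols : Int)
    (push : List (Int × Int) → List (Int × Int) → List (Int × Int))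
    (hmem : ∀ rest new x, x ∈ push rest new ↔ x ∈ rest ∨ x ∈ new)
    (hlen : ∀ rest new, (push rest new).length = rest.length + new.length) :
    ∀ (fuel : Nat) (V : Finset (Int × Int)) (w : List (Int × Int)),
      (pvUniv rows cols \ V).card + w.length ≤ fuel →
      (∀ x ∈ w, x ∈ V) →
      (∀ p ∈ V, p ∈ w ∨ ∀ q, pvAdj g rows cols p q → q ∈ V) →
      V ⊆ pvFlood g rows cols push fuel V w ∧
      (∀ z ∈ pvFlood g rows cols push fuel V w, z ∈ V ∨ ∃ x ∈ w, pvReach g rows cols x z) ∧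
      (∀ p ∈ pvFlood g rows cols push fuel V w, ∀ q, pvAdj g rows cols p q →
        q ∈ pvFlood g rows cols push fuel V w) := by
  intro fuel
  induction fuel with
  | zero =>
      intro V w hf hw hcl
      have hwnil : w = [] := by
        cases w with
        | nil => rfl
        | cons a l => simp at hf
      subst hwnil
      refine ⟨Finset.Subset.refl _, ?_, ?_⟩
      · intro z hz; exact Or.inl hz
      · intro p hp q hq
        rcases hcl p hp with h | h
        · simp at h
        · exact h q hq
  | succ fuel ih =>
      intro V w hf hw hcl
      cases w with
      | nil =>
          refine ⟨Finset.Subset.refl _, ?_, ?_⟩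
          · intro z hz; exact Or.inl hz
          · intro p hp q hq
            rcases hcl p hp with h | h
            · simp at h
            · exact h q hq
      | cons x rest =>
          simp only [pvFlood]
          set new := (pvShifts x).filter (fun q => pvGood g rows cols q && decide (q ∉ V)) with hnew
          have hnodup : new.Nodup := (pvShifts_nodup x).filter _
          have hsub : ∀ q ∈ new, pvAdj g rows cols x q ∧ q ∈ pvUniv rows cols \ V := by
            intro q hq
            rw [hnew, List.mem_filter] at hq
            obtain ⟨hsh, hcond⟩ := hq
            simp only [Bool.and_eq_true, decide_eq_true_eq] at hcond
            refine ⟨⟨hsh, hcond.1⟩, ?_⟩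
            have hg := hcond.1
            simp only [pvGood, decide_eq_true_eq] at hg
            rw [Finset.mem_sdiff, pv_mem_univ]
            exact ⟨⟨hg.1, hg.2.1, hg.2.2.1, hg.2.2.2.1⟩, hcond.2⟩
          have hNsub : new.toFinset ⊆ pvUniv rows cols \ V := by
            intro q hq; exact (hsub q (List.mem_toFinset.mp hq)).2
          have hcard : new.toFinset.card = new.length := List.toFinset_card_of_nodup hnodup
          have hfuel' : (pvUniv rows cols \ (V ∪ new.toFinset)).card + (push rest new).length ≤ fuel := by
            have heq : pvUniv rows cols \ (V ∪ new.toFinset) = (pvUniv rows cols \ V) \ new.toFinset := by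
              ext z; simp [Finset.mem_sdiff]; tauto
            have hint : new.toFinset ∩ (pvUniv rows cols \ V) = new.toFinset :=
              Finset.inter_eq_left.mpr hNsub
            rw [heq, Finset.card_sdiff, hint, hlen, hcard]
            have hle : new.toFinset.card ≤ (pvUniv rows cols \ V).card := Finset.card_le_card hNsub
            rw [hcard] at hle
            simp at hf
            omega
          have hw' : ∀ y ∈ push rest new, y ∈ V ∪ new.toFinset := by
            intro y hy
            rcases (hmem rest new y).mp hy with h | h
            · exact Finset.mem_union_left _ (hw y (List.mem_cons_of_mem _ h))
            · exact Finset.mem_union_right _ (List.mem_toFinset.mpr h)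
          have hcl' : ∀ p ∈ V ∪ new.toFinset, p ∈ push rest new ∨
              ∀ q, pvAdj g rows cols p q → q ∈ V ∪ new.toFinset := by
            intro p hp
            rcases Finset.mem_union.mp hp with hpV | hpN
            · by_cases hpx : p = x
              · subst hpx
                right
                intro q hq
                by_cases hqV : q ∈ V
                · exact Finset.mem_union_left _ hqV
                · refine Finset.mem_union_right _ (List.mem_toFinset.mpr ?_)
                  rw [hnew, List.mem_filter]
                  exact ⟨hq.1, by simp [hq.2, hqV]⟩
              · rcases hcl p hpV with h | h
                · rcases List.mem_cons.mp h with h' | h'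
                  · exact absurd h' hpx
                  · exact Or.inl ((hmem rest new p).mpr (Or.inl h'))
                · right; intro q hq; exact Finset.mem_union_left _ (h q hq)
            · exact Or.inl ((hmem rest new p).mpr (Or.inr (List.mem_toFinset.mp hpN)))
          obtain ⟨ih1, ih2, ih3⟩ := ih (V ∪ new.toFinset) (push rest new) hfuel' hw' hcl'
          refine ⟨?_, ?_, ih3⟩
          · exact fun z hz => ih1 (Finset.mem_union_left _ hz)
          · intro z hz
            rcases ih2 z hz with h | ⟨y, hy, hr⟩
            · rcases Finset.mem_union.mp h with h' | h'
              · exact Or.inl h'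
              · refine Or.inr ⟨x, List.mem_cons_self, ?_⟩
                exact Relation.ReflTransGen.single (hsub z (List.mem_toFinset.mp h')).1
            · rcases (hmem rest new y).mp hy with h' | h'
              · exact Or.inr ⟨y, List.mem_cons_of_mem _ h', hr⟩
              · refine Or.inr ⟨x, List.mem_cons_self, ?_⟩
                exact Relation.ReflTransGen.head (hsub y h').1 hr

lemma pvFlood_mem (g : List (List Int)) (rows cols : Int)
    (push : List (Int × Int) → List (Int × Int) → List (Int × Int))
    (hmem : ∀ rest new x, x ∈ push rest new ↔ x ∈ rest ∨ x ∈ new)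
    (hlen : ∀ rest new, (push rest new).length = rest.length + new.length)
    (fuel : Nat) (V : Finset (Int × Int)) (w : List (Int × Int))
    (hf : (pvUniv rows cols \ V).card + w.length ≤ fuel)
    (hw : ∀ x ∈ w, x ∈ V)
    (hcl : ∀ p ∈ V, p ∈ w ∨ ∀ q, pvAdj g rows cols p q → q ∈ V) :
    ∀ z, z ∈ pvFlood g rows cols push fuel V w ↔
      z ∈ V ∨ ∃ x ∈ w, pvReach g rows cols x z := by
  obtain ⟨h1, h2, h3⟩ := pvFlood_main g rows cols push hmem hlen fuel V w hf hw hcl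
  intro z
  constructor
  · exact h2 z
  · rintro (hz | ⟨x, hx, hr⟩)
    · exact h1 hz
    · induction hr with
      | refl => exact h1 (hw x hx)
      | tail _ hstep ihr => exact h3 _ ihr _ hstep

-- the queue worklist discipline of A's deque
def pvPushB (rest new : List (Int × Int)) : List (Int × Int) := rest ++ new

lemma pvPushB_mem : ∀ rest new x, x ∈ pvPushB rest new ↔ x ∈ rest ∨ x ∈ new := by
  simp [pvPushB]
lemma pvPushB_len : ∀ rest new : List (Int × Int), (pvPushB rest new).length = rest.length + new.length := by
  simp [pvPushB]

-- ---------- relating A's visited matrix to a finite set ----------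

def pvMRel (rows cols : Int) (v : List (List Bool)) (V : Finset (Int × Int)) : Prop :=
  v.length = rows.toNat ∧ (∀ row ∈ v, row.length = cols.toNat) ∧
  ∀ a b : Int, 0 ≤ a → a < rows → 0 ≤ b → b < cols →
    (pvBGet v a b = true ↔ (a, b) ∈ V)

lemma pvMRel_get {rows cols : Int} {v : List (List Bool)} {V : Finset (Int × Int)}
    (h : pvMRel rows cols v V) {a b : Int} (h1 : 0 ≤ a) (h2 : a < rows)
    (h3 : 0 ≤ b) (h4 : b < cols) : pvBGet v a b = decide ((a, b) ∈ V) := by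
  by_cases hm : (a, b) ∈ V
  · simp [hm, (h.2.2 a b h1 h2 h3 h4).mpr hm]
  · simp only [hm, decide_false]
    rcases Bool.eq_false_or_eq_true (pvBGet v a b) with ht | hf
    · exact absurd ((h.2.2 a b h1 h2 h3 h4).mp ht) hm
    · exact hf

lemma pvMRel_set {rows cols : Int} {v : List (List Bool)} {V : Finset (Int × Int)}
    (h : pvMRel rows cols v V) {r c : Int} (h1 : 0 ≤ r) (h2 : r < rows)
    (h3 : 0 ≤ c) (h4 : c < cols) :
    pvMRel rows cols (pvBSet v r c) (insert (r, c) V) := by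
  obtain ⟨hlen, hrows, hget⟩ := h
  have hrn : r.toNat < v.length := by omega
  have hrowlen : (v[r.toNat]).length = cols.toNat := hrows _ (List.getElem_mem hrn)
  have hcn : c.toNat < (v[r.toNat]).length := by omega
  have hrowget : PySem.List.pyGetD v r [] = v[r.toNat] :=
    PySem.List.pyGetD_eq_getElem v [] h1 (by rw [hlen]; omega)
  have hset : pvBSet v r c = v.set r.toNat ((v[r.toNat]).set c.toNat true) := by
    unfold pvBSet
    rw [hrowget, PySem.List.pySetD_of_nonneg _ true h3, PySem.List.pySetD_of_nonneg _ _ h1]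
  rw [hset]
  refine ⟨by simp [hlen], ?_, ?_⟩
  · intro row hrow
    rcases List.mem_or_eq_of_mem_set hrow with h' | h'
    · exact hrows _ h'
    · subst h'; simp [hrowlen]
  · intro a b ha1 ha2 hb1 hb2
    have han : a.toNat < v.length := by omega
    have harow : (v[a.toNat]).length = cols.toNat := hrows _ (List.getElem_mem han)
    have hbn : b.toNat < (v[a.toNat]).length := by omega
    have hget1 : PySem.List.pyGetD (v.set r.toNat ((v[r.toNat]).set c.toNat true)) a [] =
        (v.set r.toNat ((v[r.toNat]).set c.toNat true))[a.toNat]'(by rw [List.length_set]; exact han) :=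
      PySem.List.pyGetD_eq_getElem _ [] ha1 (by rw [List.length_set, hlen]; omega)
    unfold pvBGet
    rw [hget1]
    rw [List.getElem_set]
    by_cases hra : r.toNat = a.toNat
    · have hra' : r = a := by omega
      subst hra'
      rw [if_pos rfl]
      have hget2 : PySem.List.pyGetD ((v[r.toNat]).set c.toNat true) b false =
          ((v[r.toNat]).set c.toNat true)[b.toNat]'(by rw [List.length_set]; exact hbn) :=
        PySem.List.pyGetD_eq_getElem _ false hb1 (by rw [List.length_set, hrowlen]; omega)
      rw [hget2, List.getElem_set]
      by_cases hcb : c.toNat = b.toNat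
      · have hcb' : c = b := by omega
        subst hcb'
        simp
      · have hcb' : c ≠ b := by omega
        rw [if_neg hcb]
        have hold : pvBGet v r b = v[r.toNat][b.toNat]'hbn := by
          unfold pvBGet
          rw [hrowget]
          exact PySem.List.pyGetD_eq_getElem _ false hb1 (by rw [hrowlen]; omega)
        rw [← hold, hget r b h1 h2 hb1 hb2]
        simp [Finset.mem_insert, Prod.ext_iff]
        intro h'; exact absurd h'.symm hcb'
    · have hra' : r ≠ a := by omega
      rw [if_neg hra]
      have hstep2 : PySem.List.pyGetD v[a.toNat] b false = v[a.toNat][b.toNat]'hbn :=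
        PySem.List.pyGetD_eq_getElem _ false hb1 (by rw [harow]; omega)
      have hold : pvBGet v a b = v[a.toNat][b.toNat]'hbn := by
        unfold pvBGet
        rw [PySem.List.pyGetD_eq_getElem v [] ha1 (by rw [hlen]; omega)]
        exact PySem.List.pyGetD_eq_getElem _ false hb1 (by rw [harow]; omega)
      rw [hstep2, ← hold, hget a b ha1 ha2 hb1 hb2]
      simp [Finset.mem_insert, Prod.ext_iff]
      intro h'; exact absurd h'.symm hra'

lemma pvMRel_init (rows cols : Int) (hr : 0 ≤ rows) :
    pvMRel rows cols ((PySem.List.pyRange 0 rows 1).map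
      (fun _ => List.replicate cols.toNat false)) ∅ := by
  refine ⟨?_, ?_, ?_⟩
  · simp [PySem.List.length_pyRange_one]
  · intro row hrow
    obtain ⟨x, _, hEq⟩ := List.mem_map.mp hrow
    rw [← hEq]
    simp
  · intro a b h1 h2 h3 h4
    simp only [Finset.notMem_empty, iff_false]
    unfold pvBGet
    have hlen : ((PySem.List.pyRange 0 rows 1).map
        (fun _ => List.replicate cols.toNat false)).length = rows.toNat := by
      simp [PySem.List.length_pyRange_one]
    have h5 : PySem.List.pyGetD ((PySem.List.pyRange 0 rows 1).map
        (fun _ => List.replicate cols.toNat false)) a [] = List.replicate cols.toNat false := by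
      rw [PySem.List.pyGetD_eq_getElem _ [] h1 (by rw [hlen]; omega)]
      simp
    rw [h5, PySem.List.pyGetD_eq_getElem _ false h3 (by simp; omega)]
    simp

-- ---------- the running bounding box ----------

structure PvBox where
  mnr : Int
  mxr : Int
  mnc : Int
  mxc : Int
deriving DecidableEq, Repr

def pvBoxAdd (b : PvBox) (p : Int × Int) : PvBox :=
  ⟨if p.1 < b.mnr then p.1 else b.mnr,
   if p.1 > b.mxr then p.1 else b.mxr,
   if p.2 < b.mnc then p.2 else b.mnc,
   if p.2 > b.mxc then p.2 else b.mxc⟩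

-- ---------- one pass over the four directions, concrete vs abstract ----------

lemma pvBfsStep_fold (g : List (List Int)) (rows cols cr cc : Int) :
    ∀ (ds : List (Int × Int)) (v : List (List Bool)) (q cells : List (Int × Int))
      (V : Finset (Int × Int)), pvMRel rows cols v V →
      (ds.map (fun d => (cr + d.1, cc + d.2))).Nodup →
      pvMRel rows cols (ds.foldl (pvBfsStep g rows cols cr cc) (v, q, cells)).1
        (V ∪ ((ds.map (fun d => (cr + d.1, cc + d.2))).filter
          (fun p => pvGood g rows cols p && decide (p ∉ V))).toFinset) ∧
      (ds.foldl (pvBfsStep g rows cols cr cc) (v, q, cells)).2.1 =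
        q ++ (ds.map (fun d => (cr + d.1, cc + d.2))).filter
          (fun p => pvGood g rows cols p && decide (p ∉ V)) ∧
      (ds.foldl (pvBfsStep g rows cols cr cc) (v, q, cells)).2.2 =
        cells ++ (ds.map (fun d => (cr + d.1, cc + d.2))).filter
          (fun p => pvGood g rows cols p && decide (p ∉ V)) := by
  intro ds
  induction ds with
  | nil =>
      intro v q cells V hM _
      refine ⟨by simpa using hM, by simp, by simp⟩
  | cons d ds ih =>
      intro v q cells V hM hnd
      simp only [List.map_cons, List.nodup_cons] at hnd
      obtain ⟨hdni, hnd'⟩ := hnd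
      have hcond : (0 ≤ cr + d.1 ∧ cr + d.1 < rows ∧ 0 ≤ cc + d.2 ∧ cc + d.2 < cols ∧
            pvBGet v (cr + d.1) (cc + d.2) = false ∧ pvCell g (cr + d.1) (cc + d.2) = 5) ↔
          (pvGood g rows cols (cr + d.1, cc + d.2) &&
            decide ((cr + d.1, cc + d.2) ∉ V)) = true := by
        simp only [pvGood, Bool.and_eq_true, decide_eq_true_eq]
        constructor
        · rintro ⟨h1, h2, h3, h4, h5, h6⟩
          refine ⟨⟨h1, h2, h3, h4, h6⟩, ?_⟩
          rw [pvMRel_get hM h1 h2 h3 h4] at h5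
          simpa using h5
        · rintro ⟨⟨h1, h2, h3, h4, h6⟩, h5⟩
          refine ⟨h1, h2, h3, h4, ?_, h6⟩
          rw [pvMRel_get hM h1 h2 h3 h4]
          simpa using h5
      simp only [List.foldl_cons, List.map_cons]
      by_cases hc : 0 ≤ cr + d.1 ∧ cr + d.1 < rows ∧ 0 ≤ cc + d.2 ∧ cc + d.2 < cols ∧
          pvBGet v (cr + d.1) (cc + d.2) = false ∧ pvCell g (cr + d.1) (cc + d.2) = 5
      · have hfilt : (pvGood g rows cols (cr + d.1, cc + d.2) &&
            decide ((cr + d.1, cc + d.2) ∉ V)) = true := hcond.mp hc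
        have hstep : pvBfsStep g rows cols cr cc (v, q, cells) d =
            (pvBSet v (cr + d.1) (cc + d.2), q ++ [(cr + d.1, cc + d.2)],
              cells ++ [(cr + d.1, cc + d.2)]) := by
          simp only [pvBfsStep, if_pos hc]
        rw [hstep]
        have hnotV : (cr + d.1, cc + d.2) ∉ V := by
          simp only [Bool.and_eq_true, decide_eq_true_eq] at hfilt
          exact hfilt.2
        have hM' : pvMRel rows cols (pvBSet v (cr + d.1) (cc + d.2))
            (insert (cr + d.1, cc + d.2) V) :=
          pvMRel_set hM hc.1 hc.2.1 hc.2.2.1 hc.2.2.2.1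
        obtain ⟨r1, r2, r3⟩ := ih (pvBSet v (cr + d.1) (cc + d.2))
          (q ++ [(cr + d.1, cc + d.2)]) (cells ++ [(cr + d.1, cc + d.2)])
          (insert (cr + d.1, cc + d.2) V) hM' hnd'
        have hfc : (ds.map (fun d => (cr + d.1, cc + d.2))).filter
              (fun p => pvGood g rows cols p && decide (p ∉ insert (cr + d.1, cc + d.2) V)) =
            (ds.map (fun d => (cr + d.1, cc + d.2))).filter
              (fun p => pvGood g rows cols p && decide (p ∉ V)) := by
          apply List.filter_congr
          intro x hx
          have hxne : x ≠ (cr + d.1, cc + d.2) := fun h => hdni (h ▸ hx)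
          simp [Finset.mem_insert, hxne]
        rw [hfc] at r1 r2 r3
        rw [List.filter_cons, if_pos hfilt]
        have hsets : insert (cr + d.1, cc + d.2) V ∪
              ((ds.map (fun d => (cr + d.1, cc + d.2))).filter
                (fun p => pvGood g rows cols p && decide (p ∉ V))).toFinset =
            V ∪ ((cr + d.1, cc + d.2) :: (ds.map (fun d => (cr + d.1, cc + d.2))).filter
                (fun p => pvGood g rows cols p && decide (p ∉ V))).toFinset := by
          ext z
          simp [Finset.mem_insert]
          try tauto
        rw [hsets] at r1
        refine ⟨r1, ?_, ?_⟩
        · rw [r2]; simp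
        · rw [r3]; simp
      · have hfilt : (pvGood g rows cols (cr + d.1, cc + d.2) &&
            decide ((cr + d.1, cc + d.2) ∉ V)) = false := by
          rcases Bool.eq_false_or_eq_true (pvGood g rows cols (cr + d.1, cc + d.2) &&
            decide ((cr + d.1, cc + d.2) ∉ V)) with h | h
          · exact absurd (hcond.mpr h) hc
          · exact h
        have hstep : pvBfsStep g rows cols cr cc (v, q, cells) d = (v, q, cells) := by
          simp only [pvBfsStep, if_neg hc]
        rw [hstep, List.filter_cons, if_neg (fun hcon => Bool.false_ne_true (hfilt.symm.trans hcon))]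
        exact ih v q cells V hM hnd'

lemma pvBfsLoop_sim (g : List (List Int)) (rows cols : Int) (K : Finset (Int × Int)) :
    ∀ (fuel : Nat) (v : List (List Bool)) (w cells : List (Int × Int))
      (V : Finset (Int × Int)),
      pvMRel rows cols v V → K ⊆ V → cells.Nodup → cells.toFinset = V \ K →
      pvMRel rows cols (pvBfsLoop g rows cols fuel v w cells).1
        (pvFlood g rows cols pvPushB fuel V w) ∧
      (pvBfsLoop g rows cols fuel v w cells).2.Nodup ∧
      (pvBfsLoop g rows cols fuel v w cells).2.toFinset =
        pvFlood g rows cols pvPushB fuel V w \ K ∧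
      ∃ Δ : List (Int × Int), (pvBfsLoop g rows cols fuel v w cells).2 = cells ++ Δ := by
  intro fuel
  induction fuel with
  | zero =>
      intro v w cells V hM hK hnd hts
      exact ⟨hM, hnd, hts, [], by simp [pvBfsLoop]⟩
  | succ fuel ih =>
      intro v w cells V hM hK hnd hts
      cases w with
      | nil => exact ⟨hM, hnd, hts, [], by simp [pvBfsLoop]⟩
      | cons x rest =>
          obtain ⟨cr, cc⟩ := x
          have hshifts : pvDirs.map (fun d => (cr + d.1, cc + d.2)) = pvShifts (cr, cc) := rfl
          obtain ⟨s1, s2, s3⟩ := pvBfsStep_fold g rows cols cr cc pvDirs v rest cells V hM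
            (by rw [hshifts]; exact pvShifts_nodup _)
          rw [hshifts] at s1 s2 s3
          have hnodupnew : ((pvShifts (cr, cc)).filter
              (fun q => pvGood g rows cols q && decide (q ∉ V))).Nodup :=
            (pvShifts_nodup _).filter _
          have hnewV : ∀ p ∈ (pvShifts (cr, cc)).filter
              (fun q => pvGood g rows cols q && decide (q ∉ V)), p ∉ V := by
            intro p hp
            have h2 := (List.mem_filter.mp hp).2
            simp only [Bool.and_eq_true, decide_eq_true_eq] at h2
            exact h2.2
          have hcmem : ∀ z, z ∈ cells ↔ z ∈ V \ K := fun z => by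
            rw [← List.mem_toFinset, hts]
          have hndcells : (cells ++ (pvShifts (cr, cc)).filter
              (fun q => pvGood g rows cols q && decide (q ∉ V))).Nodup := by
            apply List.Nodup.append hnd hnodupnew
            intro p hp hpn
            exact hnewV p hpn (Finset.mem_sdiff.mp ((hcmem p).mp hp)).1
          have htscells : (cells ++ (pvShifts (cr, cc)).filter
                (fun q => pvGood g rows cols q && decide (q ∉ V))).toFinset =
              (V ∪ ((pvShifts (cr, cc)).filter
                (fun q => pvGood g rows cols q && decide (q ∉ V))).toFinset) \ K := by
            ext z
            simp only [List.toFinset_append, Finset.mem_union, List.mem_toFinset,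
              Finset.mem_sdiff]
            rw [hcmem z]
            simp only [Finset.mem_sdiff]
            constructor
            · rintro (⟨hz, hzk⟩ | hz)
              · exact ⟨Or.inl hz, hzk⟩
              · exact ⟨Or.inr hz, fun hzK => hnewV z hz (hK hzK)⟩
            · rintro ⟨hz | hz, hzk⟩
              · exact Or.inl ⟨hz, hzk⟩
              · exact Or.inr hz
          have hK' : K ⊆ V ∪ ((pvShifts (cr, cc)).filter
              (fun q => pvGood g rows cols q && decide (q ∉ V))).toFinset :=
            hK.trans Finset.subset_union_left
          simp only [pvBfsLoop, pvFlood, pvPushB]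
          rw [s2, s3]
          obtain ⟨r1, r2, r3, Δ, r4⟩ := ih _ _ _ _ s1 hK' hndcells htscells
          refine ⟨r1, r2, r3,
            (pvShifts (cr, cc)).filter (fun q => pvGood g rows cols q && decide (q ∉ V)) ++ Δ, ?_⟩
          rw [r4, List.append_assoc]

-- ---------- bounding boxes: fold of pvBoxAdd vs Python's min/max ----------

lemma pvBoxAdd_comm (b : PvBox) (p q : Int × Int) :
    pvBoxAdd (pvBoxAdd b p) q = pvBoxAdd (pvBoxAdd b q) p := by
  simp only [pvBoxAdd, PvBox.mk.injEq]
  refine ⟨?_, ?_, ?_, ?_⟩ <;> split_ifs <;> omega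

lemma pvBoxAdd_proj (b : PvBox) (l : List (Int × Int)) :
    (l.foldl pvBoxAdd b).mnr = (l.map Prod.fst).foldl min b.mnr ∧
    (l.foldl pvBoxAdd b).mxr = (l.map Prod.fst).foldl max b.mxr ∧
    (l.foldl pvBoxAdd b).mnc = (l.map Prod.snd).foldl min b.mnc ∧
    (l.foldl pvBoxAdd b).mxc = (l.map Prod.snd).foldl max b.mxc := by
  induction l generalizing b with
  | nil => simp
  | cons p l ih =>
      simp only [List.foldl_cons, List.map_cons]
      have h1 : (pvBoxAdd b p).mnr = min b.mnr p.1 := by simp [pvBoxAdd, min_def]; split_ifs <;> omega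
      have h2 : (pvBoxAdd b p).mxr = max b.mxr p.1 := by simp [pvBoxAdd, max_def]; split_ifs <;> omega
      have h3 : (pvBoxAdd b p).mnc = min b.mnc p.2 := by simp [pvBoxAdd, min_def]; split_ifs <;> omega
      have h4 : (pvBoxAdd b p).mxc = max b.mxc p.2 := by simp [pvBoxAdd, max_def]; split_ifs <;> omega
      obtain ⟨i1, i2, i3, i4⟩ := ih (pvBoxAdd b p)
      exact ⟨by rw [i1, h1], by rw [i2, h2], by rw [i3, h3], by rw [i4, h4]⟩

lemma pv_min?_cons (a : Int) (l : List Int) :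
    PySem.List.min? (a :: l) (id : Int → Int) = some (l.foldl min a) := by
  cases hm : PySem.List.min? (a :: l) (id : Int → Int) with
  | none => exact absurd ((PySem.List.min?_eq_none_iff _ _).mp hm) (by simp)
  | some m =>
      congr 1
      have hmem := PySem.List.min?_mem hm
      have hmin := PySem.List.min?_isMin hm
      have hfmem : l.foldl min a ∈ a :: l := List.min?_mem rfl
      have hflb : ∀ b ∈ a :: l, l.foldl min a ≤ b :=
        fun b hb => (List.le_min?_iff (xs := a :: l) rfl).mp (le_refl _) b hb
      exact le_antisymm (hmin _ hfmem) (hflb m hmem)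

lemma pv_max?_cons (a : Int) (l : List Int) :
    PySem.List.max? (a :: l) (id : Int → Int) = some (l.foldl max a) := by
  cases hm : PySem.List.max? (a :: l) (id : Int → Int) with
  | none => exact absurd ((PySem.List.max?_eq_none_iff _ _).mp hm) (by simp)
  | some m =>
      congr 1
      have hmem := PySem.List.max?_mem hm
      have hmax := PySem.List.max?_isMax hm
      have hfmem : l.foldl max a ∈ a :: l := List.max?_mem rfl
      have hfub : ∀ b ∈ a :: l, b ≤ l.foldl max a :=
        fun b hb => (List.max?_le_iff (xs := a :: l) rfl).mp (le_refl _) b hb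
      exact le_antisymm (hfub m hmem) (hmax _ hfmem)

/-- A's four min/max passes over `cells` compute exactly the fold of `pvBoxAdd` over
`cells` started at the seed's singleton box. -/
lemma pv_minmax_eq_fold (s : Int × Int) (Δ : List (Int × Int)) :
    ((PySem.List.min? (((s :: Δ).map Prod.fst)) id).getD 0,
     (PySem.List.max? (((s :: Δ).map Prod.fst)) id).getD 0,
     (PySem.List.min? (((s :: Δ).map Prod.snd)) id).getD 0,
     (PySem.List.max? (((s :: Δ).map Prod.snd)) id).getD 0) =
    (((s :: Δ).foldl pvBoxAdd ⟨s.1, s.1, s.2, s.2⟩).mnr,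
     ((s :: Δ).foldl pvBoxAdd ⟨s.1, s.1, s.2, s.2⟩).mxr,
     ((s :: Δ).foldl pvBoxAdd ⟨s.1, s.1, s.2, s.2⟩).mnc,
     ((s :: Δ).foldl pvBoxAdd ⟨s.1, s.1, s.2, s.2⟩).mxc) := by
  have h0 : pvBoxAdd (⟨s.1, s.1, s.2, s.2⟩ : PvBox) s = ⟨s.1, s.1, s.2, s.2⟩ := by
    simp [pvBoxAdd]
  obtain ⟨p1, p2, p3, p4⟩ := pvBoxAdd_proj (⟨s.1, s.1, s.2, s.2⟩ : PvBox) Δ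
  simp only [List.map_cons, List.foldl_cons, h0]
  rw [pv_min?_cons, pv_max?_cons, pv_min?_cons, pv_max?_cons]
  simp only [Option.getD_some, Prod.mk.injEq]
  exact ⟨by rw [p1], by rw [p2], by rw [p3], by rw [p4]⟩

lemma pv_foldl_box_perm {l₁ l₂ : List (Int × Int)} (h : l₁.Perm l₂) (b : PvBox) :
    l₁.foldl pvBoxAdd b = l₂.foldl pvBoxAdd b := by
  induction h generalizing b with
  | nil => rfl
  | cons x _ ih => simp only [List.foldl_cons]; exact ih _
  | swap x y l => simp only [List.foldl_cons]; rw [pvBoxAdd_comm]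
  | trans _ _ ih1 ih2 => rw [ih1, ih2]

def pvClosed (g : List (List Int)) (rows cols : Int) (V : Finset (Int × Int)) : Prop :=
  ∀ p ∈ V, ∀ q, pvAdj g rows cols p q → q ∈ V


-- ---------- symmetry of adjacency on good cells; components ----------

lemma pv_mem_shifts_symm {p q : Int × Int} (h : q ∈ pvShifts p) : p ∈ pvShifts q := by
  simp only [pvShifts, pvDirs, List.map_cons, List.map_nil, List.mem_cons,
    List.not_mem_nil, or_false, Prod.ext_iff] at h ⊢
  rcases h with h | h | h | h <;> simp_all

lemma pvAdj_symm {g : List (List Int)} {rows cols : Int} {p q : Int × Int}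
    (hp : pvGood g rows cols p = true) (h : pvAdj g rows cols p q) :
    pvAdj g rows cols q p :=
  ⟨pv_mem_shifts_symm h.1, hp⟩

lemma pvReach_good {g : List (List Int)} {rows cols : Int} {p z : Int × Int}
    (h : pvReach g rows cols p z) : z = p ∨ pvGood g rows cols z = true := by
  induction h with
  | refl => exact Or.inl rfl
  | tail _ hstep _ => exact Or.inr hstep.2

lemma pvReach_symm {g : List (List Int)} {rows cols : Int} {p q : Int × Int}
    (hp : pvGood g rows cols p = true) (h : pvReach g rows cols p q) :
    pvReach g rows cols q p := by
  induction h with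
  | refl => exact Relation.ReflTransGen.refl
  | @tail b c hpb hstep ih =>
      have hb : pvGood g rows cols b = true := by
        rcases pvReach_good hpb with h' | h'
        · subst h'; exact hp
        · exact h'
      exact Relation.ReflTransGen.head (pvAdj_symm hb hstep) ih

lemma pvClosed_reach {g : List (List Int)} {rows cols : Int} {V : Finset (Int × Int)}
    (hV : pvClosed g rows cols V) {p z : Int × Int} (hp : p ∈ V)
    (h : pvReach g rows cols p z) : z ∈ V := by
  induction h with
  | refl => exact hp
  | tail _ hstep ih => exact hV _ ih _ hstep

/-- The connected component of `p` among 5-cells (computed by the abstract flood). -/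
def pvCompC (g : List (List Int)) (rows cols : Int) (p : Int × Int) : Finset (Int × Int) :=
  pvFlood g rows cols pvPushB ((rows * cols).toNat + 1) {p} [p]

lemma pv_comp_fuel {rows cols : Int} (hr : 0 ≤ rows) (hc : 0 ≤ cols) {p : Int × Int} :
    (pvUniv rows cols \ ({p} : Finset (Int × Int))).card + ([p] : List (Int × Int)).length ≤
      (rows * cols).toNat + 1 := by
  have h5 : (pvUniv rows cols \ {p}).card ≤ (pvUniv rows cols).card :=
    Finset.card_le_card Finset.sdiff_subset
  rw [pv_card_univ hr hc] at h5
  simp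
  omega

lemma pv_mem_compC {g : List (List Int)} {rows cols : Int} (hr : 0 ≤ rows) (hc : 0 ≤ cols)
    (p : Int × Int) :
    ∀ z, z ∈ pvCompC g rows cols p ↔ z = p ∨ pvReach g rows cols p z := by
  intro z
  have := pvFlood_mem g rows cols pvPushB pvPushB_mem pvPushB_len
    ((rows * cols).toNat + 1) {p} [p] (pv_comp_fuel hr hc)
    (by intro x hx; simp at hx; simp [hx])
    (by intro q hq; simp at hq; subst hq; left; simp)
  rw [pvCompC, this z]
  simp

lemma pv_self_mem_compC {g : List (List Int)} {rows cols : Int} (hr : 0 ≤ rows)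
    (hc : 0 ≤ cols) (p : Int × Int) : p ∈ pvCompC g rows cols p := by
  rw [pv_mem_compC hr hc]; exact Or.inl rfl

lemma pv_compC_good {g : List (List Int)} {rows cols : Int} (hr : 0 ≤ rows) (hc : 0 ≤ cols)
    {p z : Int × Int} (hp : pvGood g rows cols p = true)
    (hz : z ∈ pvCompC g rows cols p) : pvGood g rows cols z = true := by
  rw [pv_mem_compC hr hc] at hz
  rcases hz with rfl | hz
  · exact hp
  · rcases pvReach_good hz with rfl | h
    · exact hp
    · exact h

lemma pv_compC_eq {g : List (List Int)} {rows cols : Int} (hr : 0 ≤ rows) (hc : 0 ≤ cols)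
    {p q : Int × Int} (hp : pvGood g rows cols p = true)
    (hq : q ∈ pvCompC g rows cols p) :
    pvCompC g rows cols q = pvCompC g rows cols p := by
  rw [pv_mem_compC hr hc] at hq
  rcases hq with rfl | hq
  · rfl
  · ext z
    rw [pv_mem_compC hr hc, pv_mem_compC hr hc]
    have hqp : pvReach g rows cols q p := pvReach_symm hp hq
    constructor
    · rintro (rfl | hz)
      · exact Or.inr hq
      · exact Or.inr (hq.trans hz)
    · rintro (rfl | hz)
      · exact Or.inr hqp
      · exact Or.inr (hqp.trans hz)

-- ---------- the row-major scan and seed cells ----------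

/-- Strict lexicographic (= row-major scan) order on cells; Python's tuple `<`. -/
abbrev pvLt (a b : Int × Int) : Prop := pvLexLtB a b = true

lemma pvLt_iff {a b : Int × Int} : pvLt a b ↔ a.1 < b.1 ∨ (a.1 = b.1 ∧ a.2 < b.2) := by
  simp [pvLt, pvLexLtB]

lemma pvLt_asymm {a b : Int × Int} (h : pvLt a b) : ¬ pvLt b a := by
  rw [pvLt_iff] at *; omega

lemma pvLt_total (a b : Int × Int) : pvLt a b ∨ a = b ∨ pvLt b a := by
  rw [pvLt_iff, pvLt_iff, Prod.ext_iff]; omega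

/-- All cells of the grid in row-major order. -/
def pvScan (rows cols : Int) : List (Int × Int) :=
  ((PySem.List.pyRange 0 rows 1).map (fun r =>
    (PySem.List.pyRange 0 cols 1).map (fun c => ((r, c) : Int × Int)))).flatten

lemma pv_mem_scan {rows cols : Int} {p : Int × Int} :
    p ∈ pvScan rows cols ↔ 0 ≤ p.1 ∧ p.1 < rows ∧ 0 ≤ p.2 ∧ p.2 < cols := by
  simp only [pvScan, List.mem_flatten, List.mem_map]
  constructor
  · rintro ⟨l, ⟨r, hr, rfl⟩, hp⟩
    obtain ⟨c, hc, rfl⟩ := List.mem_map.mp hp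
    have hr' := PySem.List.mem_pyRange_one.mp hr
    have hc' := PySem.List.mem_pyRange_one.mp hc
    exact ⟨hr'.1, hr'.2, hc'.1, hc'.2⟩
  · rintro ⟨h1, h2, h3, h4⟩
    refine ⟨(PySem.List.pyRange 0 cols 1).map (fun c => ((p.1, c) : Int × Int)),
      ⟨p.1, PySem.List.mem_pyRange_one.mpr ⟨h1, h2⟩, rfl⟩, ?_⟩
    exact List.mem_map.mpr ⟨p.2, PySem.List.mem_pyRange_one.mpr ⟨h3, h4⟩, rfl⟩

lemma pv_scan_pairwise (rows cols : Int) : (pvScan rows cols).Pairwise pvLt := by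
  rw [pvScan, List.pairwise_flatten]
  refine ⟨?_, ?_⟩
  · intro l hl
    obtain ⟨r, _, rfl⟩ := List.mem_map.mp hl
    refine List.Pairwise.map _ ?_ (PySem.List.pairwise_lt_pyRange_one 0 cols)
    intro a b hab
    rw [pvLt_iff]
    exact Or.inr ⟨rfl, hab⟩
  · rw [List.pairwise_map]
    refine (PySem.List.pairwise_lt_pyRange_one 0 rows).imp ?_
    intro a b hab x hx y hy
    obtain ⟨ca, _, rfl⟩ := List.mem_map.mp hx
    obtain ⟨cb, _, rfl⟩ := List.mem_map.mp hy
    rw [pvLt_iff]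
    exact Or.inl hab

lemma pv_scan_nodup (rows cols : Int) : (pvScan rows cols).Nodup :=
  (pv_scan_pairwise rows cols).imp (fun h => by
    intro hEq; subst hEq; exact pvLt_asymm h h)

/-- The nested row/column loop IS the fold over the row-major scan. -/
lemma pv_scan_foldl {α : Type} (rows cols : Int) (f : α → Int → Int → α) (init : α) :
    (PySem.List.pyRange 0 rows 1).foldl (fun st r =>
      (PySem.List.pyRange 0 cols 1).foldl (fun st c => f st r c) st) init =
    (pvScan rows cols).foldl (fun st q => f st q.1 q.2) init := by
  rw [pvScan, List.foldl_flatten, List.foldl_map]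
  congr 1
  funext st r
  rw [List.foldl_map]

/-- `p` is the seed (row-major-first cell) of its component. -/
def pvIsSeed (g : List (List Int)) (rows cols : Int) (p : Int × Int) : Bool :=
  pvGood g rows cols p && decide (∀ q ∈ pvCompC g rows cols p, ¬ pvLt q p)

lemma pvIsSeed_iff {g : List (List Int)} {rows cols : Int} {p : Int × Int} :
    pvIsSeed g rows cols p = true ↔
      pvGood g rows cols p = true ∧ ∀ q ∈ pvCompC g rows cols p, ¬ pvLt q p := by
  simp [pvIsSeed]

/-- every good cell's component has a (unique) seed. -/
lemma pv_exists_seed {g : List (List Int)} {rows cols : Int} (hr : 0 ≤ rows) (hc : 0 ≤ cols)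
    {p : Int × Int} (hp : pvGood g rows cols p = true) :
    ∃ m ∈ pvCompC g rows cols p, pvIsSeed g rows cols m = true ∧
      pvCompC g rows cols m = pvCompC g rows cols p ∧ (m = p ∨ pvLt m p) := by
  -- take the minimum of the (nonempty) component w.r.t. the scan measure r*cols+c
  have hne : (pvCompC g rows cols p).Nonempty := ⟨p, pv_self_mem_compC hr hc p⟩
  obtain ⟨m, hm, hmin⟩ := Finset.exists_min_image (pvCompC g rows cols p)
    (fun q => q.1 * cols + q.2) hne
  have hkey : ∀ q ∈ pvCompC g rows cols p, ¬ pvLt q m := by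
    intro q hq hlt
    have h1 := hmin q hq
    have hqg := pv_compC_good hr hc hp hq
    have hmg := pv_compC_good hr hc hp hm
    simp only [pvGood, decide_eq_true_eq] at hqg hmg
    -- lex-lt with column bounds implies the measure strictly decreases
    rw [pvLt_iff] at hlt
    rcases hlt with h | ⟨hEq, h⟩
    · have : q.1 * cols + q.2 < m.1 * cols + m.2 := by
        have hstep : (q.1 + 1) * cols ≤ m.1 * cols :=
          mul_le_mul_of_nonneg_right (by omega) hc
        nlinarith [hqg.2.2.2.1, hqg.2.2.1, hmg.2.2.1]
      omega
    · have : q.1 * cols + q.2 < m.1 * cols + m.2 := by nlinarith [hEq]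
      omega
  refine ⟨m, hm, ?_, pv_compC_eq hr hc hp hm, ?_⟩
  · rw [pvIsSeed_iff]
    refine ⟨pv_compC_good hr hc hp hm, ?_⟩
    rw [pv_compC_eq hr hc hp hm]
    exact hkey
  · rcases pvLt_total m p with h | h | h
    · exact Or.inr h
    · exact Or.inl h
    · exact absurd h (hkey p (pv_self_mem_compC hr hc p))


/-- seeds of the same component coincide. -/
lemma pv_seed_unique {g : List (List Int)} {rows cols : Int} (hr : 0 ≤ rows) (hc : 0 ≤ cols)
    {s t : Int × Int} (hs : pvIsSeed g rows cols s = true)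
    (ht : pvIsSeed g rows cols t = true)
    (hst : t ∈ pvCompC g rows cols s) : s = t := by
  rw [pvIsSeed_iff] at hs ht
  have hcomp : pvCompC g rows cols t = pvCompC g rows cols s := pv_compC_eq hr hc hs.1 hst
  have hsmem : s ∈ pvCompC g rows cols t := by
    rw [hcomp]; exact pv_self_mem_compC hr hc s
  rcases pvLt_total s t with h | h | h
  · exact absurd h (ht.2 s hsmem)
  · exact h
  · exact absurd h (hs.2 t hst)

/-- the canonical bounding box of the component of `p`, seeded at `p`. -/
noncomputable def pvBoxCC (g : List (List Int)) (rows cols : Int) (p : Int × Int) : PvBox :=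
  (pvCompC g rows cols p).toList.foldl pvBoxAdd ⟨p.1, p.1, p.2, p.2⟩

-- ---------- A's per-seed BFS against the canonical component ----------

lemma pvFindRect_spec (g : List (List Int)) {rows cols : Int} (hr : 0 ≤ rows)
    (hc : 0 ≤ cols) {r c : Int} (v : List (List Bool)) (V : Finset (Int × Int))
    (hM : pvMRel rows cols v V) (hcl : pvClosed g rows cols V)
    (hg : pvGood g rows cols (r, c) = true) (hnv : (r, c) ∉ V) :
    pvMRel rows cols (pvFindRect g rows cols r c v).1
      (V ∪ pvCompC g rows cols (r, c)) ∧
    pvClosed g rows cols (V ∪ pvCompC g rows cols (r, c)) ∧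
    (pvFindRect g rows cols r c v).2 =
      ((pvBoxCC g rows cols (r, c)).mnr, (pvBoxCC g rows cols (r, c)).mxr,
       (pvBoxCC g rows cols (r, c)).mnc, (pvBoxCC g rows cols (r, c)).mxc) := by
  have hgb : 0 ≤ r ∧ r < rows ∧ 0 ≤ c ∧ c < cols := by
    simp only [pvGood, decide_eq_true_eq] at hg
    exact ⟨hg.1, hg.2.1, hg.2.2.1, hg.2.2.2.1⟩
  set s : Int × Int := (r, c) with hs
  set V₁ : Finset (Int × Int) := insert s V with hV1
  set fuel : Nat := (rows * cols).toNat + 1 with hfuel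
  have hbound : (pvUniv rows cols \ V₁).card + ([s] : List (Int × Int)).length ≤ fuel := by
    have h5 : (pvUniv rows cols \ V₁).card ≤ (pvUniv rows cols).card :=
      Finset.card_le_card Finset.sdiff_subset
    rw [pv_card_univ hr hc] at h5
    simp [hfuel]
    omega
  have hw1 : ∀ x ∈ ([s] : List (Int × Int)), x ∈ V₁ := by
    intro x hx; simp at hx; subst hx; exact Finset.mem_insert_self _ _
  have hclw : ∀ p ∈ V₁, p ∈ ([s] : List (Int × Int)) ∨
      ∀ q, pvAdj g rows cols p q → q ∈ V₁ := by
    intro p hp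
    rcases Finset.mem_insert.mp hp with h | h
    · left; simp [h]
    · right; intro q hq; exact Finset.mem_insert_of_mem (hcl p h q hq)
  have hFB := pvFlood_mem g rows cols pvPushB pvPushB_mem pvPushB_len fuel V₁ [s]
    hbound hw1 hclw
  set F : Finset (Int × Int) := pvFlood g rows cols pvPushB fuel V₁ [s] with hF
  have hFeq : F = V ∪ pvCompC g rows cols s := by
    ext z
    rw [hF, hFB z, Finset.mem_union, pv_mem_compC hr hc]
    simp only [hV1, Finset.mem_insert, List.mem_singleton]
    constructor
    · rintro ((rfl | hz) | ⟨x, rfl, hx⟩)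
      · exact Or.inr (Or.inl rfl)
      · exact Or.inl hz
      · exact Or.inr (Or.inr hx)
    · rintro (hz | (rfl | hz))
      · exact Or.inl (Or.inr hz)
      · exact Or.inl (Or.inl rfl)
      · exact Or.inr ⟨s, rfl, hz⟩
  have hFcl : pvClosed g rows cols F :=
    (pvFlood_main g rows cols pvPushB pvPushB_mem pvPushB_len fuel V₁ [s]
      hbound hw1 hclw).2.2
  -- the component is disjoint from V
  have hdisj : ∀ z ∈ pvCompC g rows cols s, z ∉ V := by
    intro z hz hzV
    rw [pv_mem_compC hr hc] at hz
    rcases hz with rfl | hz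
    · exact hnv hzV
    · exact hnv (pvClosed_reach hcl hzV (pvReach_symm hg hz))
  -- run the BFS simulation
  have hM1 : pvMRel rows cols (pvBSet v r c) V₁ :=
    pvMRel_set hM hgb.1 hgb.2.1 hgb.2.2.1 hgb.2.2.2
  have hcells0 : ([s] : List (Int × Int)).toFinset = V₁ \ V := by
    ext z
    simp only [List.toFinset_cons, List.toFinset_nil, insert_empty_eq, Finset.mem_singleton,
      Finset.mem_sdiff, hV1, Finset.mem_insert]
    constructor
    · rintro rfl; exact ⟨Or.inl rfl, hnv⟩
    · rintro ⟨h | h, hz⟩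
      · exact h
      · exact absurd h hz
  obtain ⟨a1, a2, a3, Δ, a4⟩ := pvBfsLoop_sim g rows cols V fuel (pvBSet v r c) [s] [s] V₁
    hM1 (Finset.subset_insert _ _) (by simp) hcells0
  have hFV : F \ V = pvCompC g rows cols s := by
    rw [hFeq]
    ext z
    simp only [Finset.mem_sdiff, Finset.mem_union]
    constructor
    · rintro ⟨hz | hz, hzv⟩
      · exact absurd hz hzv
      · exact hz
    · intro hz; exact ⟨Or.inr hz, hdisj z hz⟩
  -- the collected cells are a permutation of the component's list
  have hperm : (pvBfsLoop g rows cols fuel (pvBSet v r c) [s] [s]).2.Perm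
      (pvCompC g rows cols s).toList := by
    apply List.perm_of_nodup_nodup_toFinset_eq a2 (Finset.nodup_toList _)
    rw [a3, hFV, Finset.toList_toFinset]
  have hΔ : (pvBfsLoop g rows cols fuel (pvBSet v r c) [s] [s]).2 = s :: Δ := by
    simpa using a4
  refine ⟨?_, by rw [hFeq] at hFcl; exact hFcl, ?_⟩
  · rw [← hF, hFeq] at a1; exact a1
  · show ((PySem.List.min? (((pvBfsLoop g rows cols fuel (pvBSet v r c) [s] [s]).2.map Prod.fst)) id).getD 0, _, _, _) = _
    rw [hΔ]
    have hmm := pv_minmax_eq_fold s Δ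
    have hfold : (s :: Δ).foldl pvBoxAdd ⟨s.1, s.1, s.2, s.2⟩ = pvBoxCC g rows cols s := by
      rw [pvBoxCC]
      exact pv_foldl_box_perm (by rw [← hΔ]; exact hperm) _
    rw [hfold] at hmm
    exact hmm

-- ---------- the outer double scan of A against the canonical seed/box list ----------

/-- pre-filled invariant characterising A's visited set after a scan prefix. -/
def pvVChar (g : List (List Int)) (rows cols : Int) (pre : List (Int × Int))
    (V : Finset (Int × Int)) : Prop :=
  ∀ z, z ∈ V ↔ ∃ p ∈ pre, pvGood g rows cols p = true ∧ z ∈ pvCompC g rows cols p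

/-- whether a scan cell opens a new component: guard ↔ seed. -/
lemma pv_guard_iff_seed (g : List (List Int)) {rows cols : Int} (hr : 0 ≤ rows)
    (hc : 0 ≤ cols) {pre l' : List (Int × Int)} {q : Int × Int}
    (hscan : pvScan rows cols = pre ++ q :: l') {V : Finset (Int × Int)}
    (hchar : pvVChar g rows cols pre V) :
    (pvGood g rows cols q = true ∧ q ∉ V) ↔ pvIsSeed g rows cols q = true := by
  have hpw := pv_scan_pairwise rows cols
  rw [hscan] at hpw
  have hprelt : ∀ a ∈ pre, pvLt a q := by
    intro a ha
    have := (List.pairwise_append.mp hpw).2.2 a ha q List.mem_cons_self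
    exact this
  constructor
  · rintro ⟨hgq, hnv⟩
    rw [pvIsSeed_iff]
    refine ⟨hgq, ?_⟩
    intro z hz hlt
    have hzg : pvGood g rows cols z = true := pv_compC_good hr hc hgq hz
    have hzuniv : z ∈ pvScan rows cols := by
      rw [pv_mem_scan]
      simp only [pvGood, decide_eq_true_eq] at hzg
      exact ⟨hzg.1, hzg.2.1, hzg.2.2.1, hzg.2.2.2.1⟩
    rw [hscan] at hzuniv
    have hzpre : z ∈ pre := by
      rcases List.mem_append.mp hzuniv with h | h
      · exact h
      · rcases List.mem_cons.mp h with rfl | h'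
        · exact absurd hlt (by rw [pvLt_iff]; omega)
        · have := (List.pairwise_append.mp hpw).2.1
          have hql := (List.pairwise_cons.mp this).1 z h'
          exact absurd hql (pvLt_asymm hlt)
    exact hnv ((hchar q).mpr ⟨z, hzpre, hzg, by
      rw [pv_compC_eq hr hc hgq hz]; exact pv_self_mem_compC hr hc q⟩)
  · intro hseed
    rw [pvIsSeed_iff] at hseed
    refine ⟨hseed.1, ?_⟩
    intro hqv
    obtain ⟨p, hp, hpg, hq⟩ := (hchar q).mp hqv
    have hpl : pvLt p q := hprelt p hp
    have : p ∈ pvCompC g rows cols q := by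
      rw [pv_compC_eq hr hc hpg hq]
      exact pv_self_mem_compC hr hc p
    exact hseed.2 p this hpl

/-- master induction for A's fold over the scan. -/
lemma pvA_fold (g : List (List Int)) {rows cols : Int} (hr : 0 ≤ rows) (hc : 0 ≤ cols) :
    ∀ (l pre : List (Int × Int)) (v : List (List Bool)) (out : List (List Int))
      (V : Finset (Int × Int)),
      pvScan rows cols = pre ++ l →
      pvMRel rows cols v V → pvClosed g rows cols V → pvVChar g rows cols pre V →
      (l.foldl (fun (st : List (List Bool) × List (List Int)) q =>
        if pvCell g q.1 q.2 = 5 ∧ pvBGet st.1 q.1 q.2 = false then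
          let fr := pvFindRect g rows cols q.1 q.2 st.1
          (fr.1, pvFillBox st.2 fr.2.1 fr.2.2.1 fr.2.2.2.1 fr.2.2.2.2)
        else st) (v, out)).2 =
      ((l.filter (pvIsSeed g rows cols)).map (pvBoxCC g rows cols)).foldl
        (fun o b => pvFillBox o b.mnr b.mxr b.mnc b.mxc) out := by
  intro l
  induction l with
  | nil => intro pre v out V _ _ _ _; simp
  | cons q l' ih =>
      intro pre v out V hscan hM hcl hchar
      have hqmem : q ∈ pvScan rows cols := by rw [hscan]; simp
      have hqb := pv_mem_scan.mp hqmem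
      have hguard : (pvCell g q.1 q.2 = 5 ∧ pvBGet v q.1 q.2 = false) ↔
          (pvGood g rows cols q = true ∧ q ∉ V) := by
        have hget := pvMRel_get hM hqb.1 hqb.2.1 hqb.2.2.1 hqb.2.2.2
        simp only [pvGood, decide_eq_true_eq]
        constructor
        · rintro ⟨h5, hvis⟩
          refine ⟨⟨hqb.1, hqb.2.1, hqb.2.2.1, hqb.2.2.2, h5⟩, ?_⟩
          rw [hget] at hvis; simpa using hvis
        · rintro ⟨⟨_, _, _, _, h5⟩, hnv⟩
          refine ⟨h5, ?_⟩
          rw [hget]; simpa using hnv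
      have hseediff := pv_guard_iff_seed g hr hc hscan hchar
      simp only [List.foldl_cons, List.filter_cons]
      by_cases hg : pvCell g q.1 q.2 = 5 ∧ pvBGet v q.1 q.2 = false
      · have hseed : pvIsSeed g rows cols q = true := hseediff.mp (hguard.mp hg)
        have hgq : pvGood g rows cols q = true := (hguard.mp hg).1
        have hnv : q ∉ V := (hguard.mp hg).2
        rw [if_pos hg, if_pos hseed]
        obtain ⟨m1, m2, m3⟩ := pvFindRect_spec g hr hc v V hM hcl
          (by rw [show ((q.1, q.2) : Int × Int) = q from rfl]; exact hgq)
          (by rw [show ((q.1, q.2) : Int × Int) = q from rfl]; exact hnv)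
        have hchar' : pvVChar g rows cols (pre ++ [q]) (V ∪ pvCompC g rows cols (q.1, q.2)) := by
          intro z
          rw [Finset.mem_union, hchar z]
          constructor
          · rintro (⟨p, hp, hpg, hz⟩ | hz)
            · exact ⟨p, by simp [hp], hpg, hz⟩
            · exact ⟨q, by simp, hgq, hz⟩
          · rintro ⟨p, hp, hpg, hz⟩
            rcases List.mem_append.mp hp with h | h
            · exact Or.inl ⟨p, h, hpg, hz⟩
            · rw [List.mem_singleton] at h; subst p
              exact Or.inr hz
        have := ih (pre ++ [q]) (pvFindRect g rows cols q.1 q.2 v).1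
          (pvFillBox out (pvFindRect g rows cols q.1 q.2 v).2.1
            (pvFindRect g rows cols q.1 q.2 v).2.2.1
            (pvFindRect g rows cols q.1 q.2 v).2.2.2.1
            (pvFindRect g rows cols q.1 q.2 v).2.2.2.2)
          (V ∪ pvCompC g rows cols (q.1, q.2))
          (by rw [hscan]; simp) m1 m2 hchar'
        rw [this, m3]
        simp only [List.map_cons, List.foldl_cons]
      · rw [if_neg hg, if_neg (by
          intro hcon
          exact hg (hguard.mpr (hseediff.mpr hcon)))]
        have hchar' : pvVChar g rows cols (pre ++ [q]) V := by
          intro z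
          rw [hchar z]
          constructor
          · rintro ⟨p, hp, hpg, hz⟩
            exact ⟨p, by simp [hp], hpg, hz⟩
          · rintro ⟨p, hp, hpg, hz⟩
            rcases List.mem_append.mp hp with h | h
            · exact ⟨p, h, hpg, hz⟩
            · rw [List.mem_singleton] at h; subst p
              -- q is good but not a seed (or not good at all): its component is already in V
              by_cases hgq : pvGood g rows cols q = true
              · have hqv : q ∈ V := by
                  by_contra hnv
                  exact hg (hguard.mpr ⟨hgq, hnv⟩)
                obtain ⟨p', hp', hpg', hq'⟩ := (hchar q).mp hqv
                refine ⟨p', hp', hpg', ?_⟩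
                rw [← pv_compC_eq hr hc hpg' hq']
                rw [pv_compC_eq hr hc hgq (pv_self_mem_compC hr hc q)] at hz
                exact hz
              · exact absurd hpg hgq
        exact ih (pre ++ [q]) v out V (by rw [hscan]; simp) hM hcl hchar'

/-- the canonical list of bounding boxes, one per component, in seed (row-major) order. -/
noncomputable def pvBoxes (g : List (List Int)) (rows cols : Int) : List PvBox :=
  ((pvScan rows cols).filter (pvIsSeed g rows cols)).map (pvBoxCC g rows cols)

lemma pvA_eq_target (grid : List (List Int)) :
    solve_bb43febb grid =
      (pvBoxes grid (PySem.List.len grid)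
        (PySem.List.len (PySem.List.pyGetD grid 0 []))).foldl
        (fun o b => pvFillBox o b.mnr b.mxr b.mnc b.mxc) grid := by
  have hr : (0 : Int) ≤ PySem.List.len grid := by
    rw [PySem.List.len_eq]; exact Int.natCast_nonneg _
  have hc : (0 : Int) ≤ PySem.List.len (PySem.List.pyGetD grid 0 []) := by
    rw [PySem.List.len_eq]; exact Int.natCast_nonneg _
  unfold solve_bb43febb
  simp only [List.map_id']
  rw [pv_scan_foldl]
  have := pvA_fold grid hr hc (pvScan (PySem.List.len grid)
      (PySem.List.len (PySem.List.pyGetD grid 0 []))) []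
    ((PySem.List.pyRange 0 (PySem.List.len grid) 1).map
      (fun _ => List.replicate (PySem.List.len (PySem.List.pyGetD grid 0 [])).toNat false))
    grid ∅ (by simp) (pvMRel_init _ _ hr)
    (fun p hp => absurd hp (Finset.notMem_empty p))
    (by intro z; simp)
  rw [this]
  rfl

-- ---------- union-find: the parent forest ----------

def pvFuel (rows cols : Int) : Nat := (rows * cols).toNat + 1

/-- forest invariant: keys unique, every edge goes to a strictly earlier good cell
of the same component. -/
def pvPar (g : List (List Int)) (rows cols : Int)
    (P : PySem.Dict (Int × Int) (Int × Int)) : Prop :=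
  P.keys.Nodup ∧
  ∀ k val, P.get? k = some val → pvGood g rows cols k = true ∧
    pvGood g rows cols val = true ∧ pvLt val k ∧ pvReach g rows cols k val

/-- scan measure: parent edges strictly decrease it. -/
def pvMu (cols : Int) (p : Int × Int) : Nat := (p.1 * cols + p.2).toNat + 1

lemma pv_mu_lt {g : List (List Int)} {rows cols : Int} {v k : Int × Int}
    (hv : pvGood g rows cols v = true) (hk : pvGood g rows cols k = true)
    (h : pvLt v k) : pvMu cols v < pvMu cols k := by
  simp only [pvGood, decide_eq_true_eq] at hv hk
  rw [pvLt_iff] at h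
  have hc : (0 : Int) ≤ cols := by omega
  have hint : v.1 * cols + v.2 < k.1 * cols + k.2 := by
    rcases h with h | ⟨hEq, h⟩
    · have h1 : (v.1 + 1) * cols ≤ k.1 * cols :=
        mul_le_mul_of_nonneg_right (by omega) hc
      nlinarith [hv.2.2.2.1, hv.2.2.1]
    · nlinarith [hEq]
  have hpos : 0 ≤ v.1 * cols + v.2 := by
    have := mul_nonneg hv.1 hc
    omega
  simp only [pvMu]
  omega

lemma pv_mu_le_fuel {g : List (List Int)} {rows cols : Int} {p : Int × Int}
    (hp : pvGood g rows cols p = true) : pvMu cols p ≤ pvFuel rows cols := by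
  simp only [pvGood, decide_eq_true_eq] at hp
  have hc : (0 : Int) ≤ cols := by omega
  have h1 : p.1 * cols ≤ (rows - 1) * cols :=
    mul_le_mul_of_nonneg_right (by omega) hc
  have h2 : p.1 * cols + p.2 ≤ rows * cols - 1 := by nlinarith
  have hpos : 0 ≤ p.1 * cols + p.2 := by
    have := mul_nonneg hp.1 hc
    omega
  simp only [pvMu, pvFuel]
  omega

lemma pvFind_of_none {P : PySem.Dict (Int × Int) (Int × Int)} {p : Int × Int}
    (h : P.get? p = none) : ∀ f, pvFind P f p = p := by
  intro f
  cases f with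
  | zero => rfl
  | succ f =>
      simp [pvFind, PySem.Dict.getD_of_get?_eq_none _ _ h]

lemma pvFind_stable {g : List (List Int)} {rows cols : Int}
    {P : PySem.Dict (Int × Int) (Int × Int)} (hP : pvPar g rows cols P) :
    ∀ (n : Nat) (p : Int × Int), pvMu cols p ≤ n →
      ∀ f1 f2, n ≤ f1 → n ≤ f2 → pvFind P f1 p = pvFind P f2 p := by
  intro n
  induction n with
  | zero => intro p hmu; simp [pvMu] at hmu
  | succ n ih =>
      intro p hmu f1 f2 h1 h2
      cases f1 with
      | zero => omega
      | succ f1 =>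
        cases f2 with
        | zero => omega
        | succ f2 =>
            cases hget : P.get? p with
            | none => rw [pvFind_of_none hget, pvFind_of_none hget]
            | some v =>
                obtain ⟨hkg, hvg, hlt, _⟩ := hP.2 p v hget
                have hne : v ≠ p := by
                  intro hEq; subst hEq; exact pvLt_asymm hlt hlt
                have hgd : P.getD p p = v := by
                  rw [PySem.Dict.getD_eq_get?_getD, hget]; rfl
                simp only [pvFind, hgd, if_pos hne]
                have hmu' : pvMu cols v ≤ n := by
                  have := pv_mu_lt hvg hkg hlt
                  omega
                exact ih v hmu' f1 f2 (by omega) (by omega)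

lemma pvFind_congr {g : List (List Int)} {rows cols : Int}
    {P : PySem.Dict (Int × Int) (Int × Int)} (hP : pvPar g rows cols P)
    {p v : Int × Int} (hget : P.get? p = some v) :
    pvFind P (pvFuel rows cols) p = pvFind P (pvFuel rows cols) v := by
  obtain ⟨hkg, hvg, hlt, _⟩ := hP.2 p v hget
  have hne : v ≠ p := by
    intro hEq; subst hEq; exact pvLt_asymm hlt hlt
  have hgd : P.getD p p = v := by
    rw [PySem.Dict.getD_eq_get?_getD, hget]; rfl
  have hfp : pvMu cols p ≤ pvFuel rows cols := pv_mu_le_fuel hkg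
  have hfv : pvMu cols v < pvMu cols p := pv_mu_lt hvg hkg hlt
  cases hf : pvFuel rows cols with
  | zero => simp [pvFuel] at hf
  | succ f =>
      simp only [pvFind, hgd, if_pos hne]
      exact pvFind_stable hP (pvMu cols v) v (le_refl _) f (f + 1)
        (by omega) (by omega)

/-- the root of a good cell: no parent, good, in the same component. -/
lemma pvFind_good {g : List (List Int)} {rows cols : Int} (hr : 0 ≤ rows) (hc : 0 ≤ cols)
    {P : PySem.Dict (Int × Int) (Int × Int)} (hP : pvPar g rows cols P) :
    ∀ (n : Nat) (p : Int × Int), pvGood g rows cols p = true → pvMu cols p ≤ n →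
      P.get? (pvFind P (pvFuel rows cols) p) = none ∧
      pvFind P (pvFuel rows cols) p ∈ pvCompC g rows cols p ∧
      pvGood g rows cols (pvFind P (pvFuel rows cols) p) = true := by
  intro n
  induction n with
  | zero => intro p _ hmu; simp [pvMu] at hmu
  | succ n ih =>
      intro p hpg hmu
      cases hget : P.get? p with
      | none =>
          rw [pvFind_of_none hget]
          exact ⟨hget, pv_self_mem_compC hr hc p, hpg⟩
      | some v =>
          obtain ⟨hkg, hvg, hlt, hrch⟩ := hP.2 p v hget
          have hmu' : pvMu cols v ≤ n := by
            have := pv_mu_lt hvg hkg hlt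
            omega
          have hstep := pvFind_congr hP hget
          obtain ⟨i1, i2, i3⟩ := ih v hvg hmu'
          rw [hstep]
          refine ⟨i1, ?_, i3⟩
          have hvmem : v ∈ pvCompC g rows cols p := by
            rw [pv_mem_compC hr hc]; exact Or.inr hrch
          rw [← pv_compC_eq hr hc hpg hvmem]
          exact i2

/-- effect of a union (insert at a fresh root) on every root computation. -/
lemma pvFind_insert {g : List (List Int)} {rows cols : Int} (hr : 0 ≤ rows) (hc : 0 ≤ cols)
    {P : PySem.Dict (Int × Int) (Int × Int)} (hP : pvPar g rows cols P)
    {hi lo : Int × Int} (hhi : P.get? hi = none) (hlo : P.get? lo = none)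
    (hgHi : pvGood g rows cols hi = true) (hgLo : pvGood g rows cols lo = true)
    (hlt : pvLt lo hi) (hrch : pvReach g rows cols hi lo) :
    pvPar g rows cols (P.insert hi lo) ∧
    ∀ (n : Nat) (p : Int × Int), pvGood g rows cols p = true → pvMu cols p ≤ n →
      pvFind (P.insert hi lo) (pvFuel rows cols) p =
        (if pvFind P (pvFuel rows cols) p = hi then lo else pvFind P (pvFuel rows cols) p) := by
  have hloNe : lo ≠ hi := by
    intro hEq; subst hEq; exact pvLt_asymm hlt hlt
  have hP' : pvPar g rows cols (P.insert hi lo) := by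
    constructor
    · exact PySem.Dict.nodup_keys_insert _ _ _ hP.1
    · intro k val hget
      rw [PySem.Dict.get?_insert] at hget
      by_cases hk : k = hi
      · rw [if_pos hk] at hget
        subst hk
        cases hget
        exact ⟨hgHi, hgLo, hlt, hrch⟩
      · rw [if_neg hk] at hget
        exact hP.2 k val hget
  refine ⟨hP', ?_⟩
  intro n
  induction n with
  | zero => intro p _ hmu; simp [pvMu] at hmu
  | succ n ih =>
      intro p hpg hmu
      cases hget : P.get? p with
      | none =>
          rw [pvFind_of_none hget]
          by_cases hphi : p = hi
          · subst hphi
            have hget' : (P.insert p lo).get? p = some lo := PySem.Dict.get?_insert_self _ _ _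
            rw [pvFind_congr hP' hget']
            have h : (P.insert p lo).get? lo = none := by
              rw [PySem.Dict.get?_insert, if_neg hloNe]; exact hlo
            rw [pvFind_of_none h, if_pos rfl]
          · have hget' : (P.insert hi lo).get? p = none := by
              rw [PySem.Dict.get?_insert, if_neg hphi]; exact hget
            rw [pvFind_of_none hget', if_neg hphi]
      | some v =>
          obtain ⟨hkg, hvg, hlt', _⟩ := hP.2 p v hget
          have hphi : p ≠ hi := by
            intro hEq; subst hEq; rw [hget] at hhi; cases hhi
          have hget' : (P.insert hi lo).get? p = some v := by
            rw [PySem.Dict.get?_insert, if_neg hphi]; exact hget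
          have hmu' : pvMu cols v ≤ n := by
            have := pv_mu_lt hvg hkg hlt'
            omega
          rw [pvFind_congr hP' hget', pvFind_congr hP hget]
          exact ih v hvg hmu'

-- ---------- pass 1: the union scan builds exactly the component partition ----------

/-- invariant after the union scan has processed `pre`: forest ok, and every processed
good cell has been merged with its good right/down neighbours. -/
def pvUFInv (g : List (List Int)) (rows cols : Int) (pre : List (Int × Int))
    (P : PySem.Dict (Int × Int) (Int × Int)) : Prop :=
  pvPar g rows cols P ∧
  ∀ p ∈ pre, ∀ n ∈ [((p.1 : Int), p.2 + 1), (p.1 + 1, (p.2 : Int))],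
    pvGood g rows cols p = true → pvGood g rows cols n = true →
    pvFind P (pvFuel rows cols) p = pvFind P (pvFuel rows cols) n

lemma pvUnionStep_spec (g : List (List Int)) {rows cols : Int} (hr : 0 ≤ rows)
    (hc : 0 ≤ cols) {P : PySem.Dict (Int × Int) (Int × Int)} (hP : pvPar g rows cols P)
    {q n : Int × Int} (hq : pvGood g rows cols q = true) (hmem : n ∈ pvShifts q)
    (hn0 : 0 ≤ n.1 ∧ 0 ≤ n.2) :
    pvPar g rows cols (pvUnionStep g rows cols (pvFuel rows cols) q.1 q.2 P n) ∧
    (∀ x y, pvGood g rows cols x = true → pvGood g rows cols y = true →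
      pvFind P (pvFuel rows cols) x = pvFind P (pvFuel rows cols) y →
      pvFind (pvUnionStep g rows cols (pvFuel rows cols) q.1 q.2 P n) (pvFuel rows cols) x =
        pvFind (pvUnionStep g rows cols (pvFuel rows cols) q.1 q.2 P n) (pvFuel rows cols) y) ∧
    (pvGood g rows cols n = true →
      pvFind (pvUnionStep g rows cols (pvFuel rows cols) q.1 q.2 P n) (pvFuel rows cols) q =
        pvFind (pvUnionStep g rows cols (pvFuel rows cols) q.1 q.2 P n) (pvFuel rows cols) n) := by
  have hqb : 0 ≤ q.1 ∧ q.1 < rows ∧ 0 ≤ q.2 ∧ q.2 < cols := by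
    simp only [pvGood, decide_eq_true_eq] at hq
    exact ⟨hq.1, hq.2.1, hq.2.2.1, hq.2.2.2.1⟩
  have hguard : (n.1 < rows ∧ n.2 < cols ∧ pvCell g n.1 n.2 = 5) ↔
      pvGood g rows cols n = true := by
    simp only [pvGood, decide_eq_true_eq]
    constructor
    · rintro ⟨h1, h2, h3⟩; exact ⟨hn0.1, h1, hn0.2, h2, h3⟩
    · rintro ⟨_, h1, _, h2, h3⟩; exact ⟨h1, h2, h3⟩
  by_cases hG : n.1 < rows ∧ n.2 < cols ∧ pvCell g n.1 n.2 = 5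
  · have hgn : pvGood g rows cols n = true := hguard.mp hG
    have hadj : pvAdj g rows cols q n := ⟨hmem, hgn⟩
    have hnq : n ∈ pvCompC g rows cols q := by
      rw [pv_mem_compC hr hc]
      exact Or.inr (Relation.ReflTransGen.single hadj)
    have hcompn : pvCompC g rows cols n = pvCompC g rows cols q :=
      pv_compC_eq hr hc hq hnq
    obtain ⟨hraN, hraC, hraG⟩ := pvFind_good hr hc hP (pvMu cols q) q hq (le_refl _)
    obtain ⟨hrbN, hrbC, hrbG⟩ := pvFind_good hr hc hP (pvMu cols n) n hgn (le_refl _)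
    set ra := pvFind P (pvFuel rows cols) q with hra
    set rb := pvFind P (pvFuel rows cols) n with hrb
    have hstep : pvUnionStep g rows cols (pvFuel rows cols) q.1 q.2 P n =
        if ra ≠ rb then
          PySem.Dict.insert P (if pvLexLtB ra rb then rb else ra)
            (if pvLexLtB ra rb then ra else rb)
        else P := by
      rw [pvUnionStep, if_pos hG]
    by_cases hEq : ra = rb
    · rw [hstep, if_neg (by simp [hEq])]
      exact ⟨hP, fun x y _ _ h => h, fun _ => hEq⟩
    · rw [hstep, if_pos hEq]
      have hrbCq : rb ∈ pvCompC g rows cols q := by rw [← hcompn]; exact hrbC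
      -- orientation of the union
      have hkey : ∀ lo hi : Int × Int, lo ∈ pvCompC g rows cols q →
          hi ∈ pvCompC g rows cols q → pvGood g rows cols lo = true →
          pvGood g rows cols hi = true → lo ≠ hi → pvLt lo hi →
          P.get? hi = none → P.get? lo = none →
          pvPar g rows cols (P.insert hi lo) ∧
          (∀ x, pvGood g rows cols x = true →
            pvFind (P.insert hi lo) (pvFuel rows cols) x =
              (if pvFind P (pvFuel rows cols) x = hi then lo
               else pvFind P (pvFuel rows cols) x)) := by
        intro lo hi hloC hhiC hloG hhiG hne hlt hhiN hloN
        have hrch : pvReach g rows cols hi lo := by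
          have : lo ∈ pvCompC g rows cols hi := by
            rw [pv_compC_eq hr hc hq hhiC]; exact hloC
          rw [pv_mem_compC hr hc] at this
          rcases this with h | h
          · exact absurd h hne
          · exact h
        obtain ⟨h1, h2⟩ := pvFind_insert hr hc hP hhiN hloN hhiG hloG hlt hrch
        exact ⟨h1, fun x hx => h2 (pvMu cols x) x hx (le_refl _)⟩
      by_cases hlt : pvLexLtB ra rb = true
      · simp only [if_pos hlt]
        obtain ⟨h1, h2⟩ := hkey ra rb hraC hrbCq hraG hrbG hEq hlt hrbN hraN
        refine ⟨h1, ?_, ?_⟩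
        · intro x y hx hy hxy
          rw [h2 x hx, h2 y hy, hxy]
        · intro _
          rw [h2 q hq, h2 n hgn, ← hra, ← hrb]
          simp [hEq]
      · simp only [if_neg (by simp [hlt] : ¬ (pvLexLtB ra rb = true))]
        have hlt' : pvLt rb ra := by
          rcases pvLt_total ra rb with h | h | h
          · exact absurd h (by simp [hlt])
          · exact absurd h hEq
          · exact h
        obtain ⟨h1, h2⟩ := hkey rb ra hrbCq hraC hrbG hraG (Ne.symm hEq) hlt' hraN hrbN
        refine ⟨h1, ?_, ?_⟩
        · intro x y hx hy hxy
          rw [h2 x hx, h2 y hy, hxy]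
        · intro _
          rw [h2 q hq, h2 n hgn, ← hra, ← hrb]
          simp [Ne.symm hEq]
  · rw [pvUnionStep, if_neg hG]
    exact ⟨hP, fun x y _ _ h => h, fun hgn => absurd (hguard.mpr hgn) hG⟩

/-- master induction for B's union scan. -/
lemma pvB_pass1 (g : List (List Int)) {rows cols : Int} (hr : 0 ≤ rows) (hc : 0 ≤ cols) :
    ∀ (l pre : List (Int × Int)) (P : PySem.Dict (Int × Int) (Int × Int)),
      pvScan rows cols = pre ++ l → pvUFInv g rows cols pre P →
      pvUFInv g rows cols (pre ++ l)
        (l.foldl (fun par q =>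
          if pvCell g q.1 q.2 = 5 then
            [((q.1 : Int), q.2 + 1), (q.1 + 1, (q.2 : Int))].foldl
              (pvUnionStep g rows cols (pvFuel rows cols) q.1 q.2) par
          else par) P) := by
  intro l
  induction l with
  | nil => intro pre P _ hInv; simpa using hInv
  | cons q l' ih =>
      intro pre P hscan hInv
      have hqmem : q ∈ pvScan rows cols := by rw [hscan]; simp
      have hqb := pv_mem_scan.mp hqmem
      simp only [List.foldl_cons]
      have hmain : pvUFInv g rows cols (pre ++ [q])
          (if pvCell g q.1 q.2 = 5 then
            [((q.1 : Int), q.2 + 1), (q.1 + 1, (q.2 : Int))].foldl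
              (pvUnionStep g rows cols (pvFuel rows cols) q.1 q.2) P
          else P) := by
        by_cases h5 : pvCell g q.1 q.2 = 5
        · have hq : pvGood g rows cols q = true := by
            simp only [pvGood, decide_eq_true_eq]
            exact ⟨hqb.1, hqb.2.1, hqb.2.2.1, hqb.2.2.2, h5⟩
          rw [if_pos h5]
          simp only [List.foldl_cons, List.foldl_nil]
          set n1 : Int × Int := (q.1, q.2 + 1) with hn1
          set n2 : Int × Int := (q.1 + 1, q.2) with hn2
          have hm1 : n1 ∈ pvShifts q := by simp [pvShifts, pvDirs, hn1]
          have hm2 : n2 ∈ pvShifts q := by simp [pvShifts, pvDirs, hn2]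
          obtain ⟨s1P, s1pres, s1new⟩ := pvUnionStep_spec g hr hc hInv.1 hq hm1
            (by simp [hn1]; omega)
          set P1 := pvUnionStep g rows cols (pvFuel rows cols) q.1 q.2 P n1 with hP1
          obtain ⟨s2P, s2pres, s2new⟩ := pvUnionStep_spec g hr hc s1P hq hm2
            (by simp [hn2]; omega)
          set P2 := pvUnionStep g rows cols (pvFuel rows cols) q.1 q.2 P1 n2 with hP2
          refine ⟨s2P, ?_⟩
          intro p hp m hm hpg hmg
          rcases List.mem_append.mp hp with hpre | hpq
          · -- old merges survive both steps
            have hmB : pvGood g rows cols m = true := hmg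
            have h0 := hInv.2 p hpre m hm hpg hmg
            exact s2pres p m hpg hmg (s1pres p m hpg hmg h0)
          · rw [List.mem_singleton] at hpq
            subst hpq
            rcases List.mem_cons.mp hm with rfl | hm'
            · -- right neighbour: merged by step 1, preserved by step 2
              exact s2pres p n1 hpg hmg (s1new hmg)
            · rw [List.mem_singleton] at hm'
              subst hm'
              exact s2new hmg
        · rw [if_neg h5]
          refine ⟨hInv.1, ?_⟩
          intro p hp m hm hpg hmg
          rcases List.mem_append.mp hp with hpre | hpq
          · exact hInv.2 p hpre m hm hpg hmg
          · rw [List.mem_singleton] at hpq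
            subst hpq
            exfalso
            simp only [pvGood, decide_eq_true_eq] at hpg
            exact h5 hpg.2.2.2.2
      have := ih (pre ++ [q]) _ (by rw [hscan]; simp) hmain
      simpa using this

/-- after the whole union scan, roots classify exactly the components. -/
lemma pvB_classes (g : List (List Int)) {rows cols : Int} (hr : 0 ≤ rows) (hc : 0 ≤ cols)
    {P : PySem.Dict (Int × Int) (Int × Int)}
    (hInv : pvUFInv g rows cols (pvScan rows cols) P) :
    ∀ p q, pvGood g rows cols p = true → pvGood g rows cols q = true →
      (pvFind P (pvFuel rows cols) p = pvFind P (pvFuel rows cols) q ↔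
        q ∈ pvCompC g rows cols p) := by
  have hreach : ∀ p z, pvGood g rows cols p = true → pvReach g rows cols p z →
      pvFind P (pvFuel rows cols) p = pvFind P (pvFuel rows cols) z := by
    intro p z hp hpz
    induction hpz with
    | refl => rfl
    | @tail b c hpb hstep ihz =>
        have hb : pvGood g rows cols b = true := by
          rcases pvReach_good hpb with h' | h'
          · subst h'; exact hp
          · exact h'
        have hcg : pvGood g rows cols c = true := hstep.2
        have hbscan : b ∈ pvScan rows cols := by
          rw [pv_mem_scan]
          simp only [pvGood, decide_eq_true_eq] at hb
          exact ⟨hb.1, hb.2.1, hb.2.2.1, hb.2.2.2.1⟩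
        have hcscan : c ∈ pvScan rows cols := by
          rw [pv_mem_scan]
          simp only [pvGood, decide_eq_true_eq] at hcg
          exact ⟨hcg.1, hcg.2.1, hcg.2.2.1, hcg.2.2.2.1⟩
        obtain ⟨b1, b2⟩ := b
        obtain ⟨c1, c2⟩ := c
        have hbc : pvFind P (pvFuel rows cols) (b1, b2) = pvFind P (pvFuel rows cols) (c1, c2) := by
          have hmem := hstep.1
          simp only [pvShifts, pvDirs, List.map_cons, List.map_nil, List.mem_cons,
            List.not_mem_nil, or_false, Prod.mk.injEq, add_zero] at hmem
          rcases hmem with ⟨h1, h2⟩ | ⟨h1, h2⟩ | ⟨h1, h2⟩ | ⟨h1, h2⟩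
          · -- up: b is c's down neighbour
            subst c1 c2
            have hpe : ((b1 + -1 + 1 : Int), b2) = ((b1 : Int), b2) := by norm_num
            have hx := hInv.2 (b1 + -1, b2) hcscan (b1 + -1 + 1, b2) (by simp) hcg
              (by rw [hpe]; exact hb)
            rw [hpe] at hx
            exact hx.symm
          · -- down neighbour of b
            subst c1 c2
            exact hInv.2 (b1, b2) hbscan (b1 + 1, b2) (by simp) hb hcg
          · -- left: b is c's right neighbour
            subst c1 c2
            have hpe : ((b1 : Int), b2 + -1 + 1) = ((b1 : Int), b2) := by norm_num
            have hx := hInv.2 (b1, b2 + -1) hcscan (b1, b2 + -1 + 1) (by simp) hcg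
              (by rw [hpe]; exact hb)
            rw [hpe] at hx
            exact hx.symm
          · -- right neighbour of b
            subst c1 c2
            exact hInv.2 (b1, b2) hbscan (b1, b2 + 1) (by simp) hb hcg
        exact ihz.trans hbc
  intro p q hp hq
  constructor
  · intro hfind
    obtain ⟨_, hpC, _⟩ := pvFind_good hr hc hInv.1 (pvMu cols p) p hp (le_refl _)
    obtain ⟨_, hqC, _⟩ := pvFind_good hr hc hInv.1 (pvMu cols q) q hq (le_refl _)
    have h1 : pvCompC g rows cols (pvFind P (pvFuel rows cols) p) = pvCompC g rows cols p :=
      pv_compC_eq hr hc hp hpC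
    have h2 : pvCompC g rows cols (pvFind P (pvFuel rows cols) q) = pvCompC g rows cols q :=
      pv_compC_eq hr hc hq hqC
    rw [hfind, h2] at h1
    rw [← h1]
    exact pv_self_mem_compC hr hc q
  · intro hqC
    rw [pv_mem_compC hr hc] at hqC
    rcases hqC with rfl | hqC
    · rfl
    · exact hreach p q hp hqC

-- ---------- pass 2: grouping by root accumulates each component's box ----------

def pvT (b : PvBox) : Int × Int × Int × Int := (b.mnr, b.mxr, b.mnc, b.mxc)

lemma pvT_add (b : PvBox) (p : Int × Int) :
    (min b.mnr p.1, max b.mxr p.1, min b.mnc p.2, max b.mxc p.2) = pvT (pvBoxAdd b p) := by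
  simp only [pvT, pvBoxAdd, Prod.mk.injEq, min_def, max_def]
  refine ⟨?_, ?_, ?_, ?_⟩ <;> split_ifs <;> omega

lemma pvBoxAdd_self (p : Int × Int) :
    pvBoxAdd ⟨p.1, p.1, p.2, p.2⟩ p = ⟨p.1, p.1, p.2, p.2⟩ := by
  simp [pvBoxAdd]

/-- running box of the component of `s` over the processed prefix. -/
def pvPart (g : List (List Int)) (rows cols : Int) (pre : List (Int × Int))
    (s : Int × Int) : PvBox :=
  (pre.filter (fun x => decide (x ∈ pvCompC g rows cols s))).foldl pvBoxAdd
    ⟨s.1, s.1, s.2, s.2⟩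

lemma pvPart_append (g : List (List Int)) (rows cols : Int) (pre : List (Int × Int))
    (q s : Int × Int) :
    pvPart g rows cols (pre ++ [q]) s =
      if q ∈ pvCompC g rows cols s then pvBoxAdd (pvPart g rows cols pre s) q
      else pvPart g rows cols pre s := by
  unfold pvPart
  rw [List.filter_append]
  by_cases h : q ∈ pvCompC g rows cols s
  · rw [if_pos h]
    simp [h, List.foldl_append]
  · rw [if_neg h]
    simp [h]

/-- master induction for B's grouping scan (P is the finished parent forest). -/
lemma pvB_pass2 (g : List (List Int)) {rows cols : Int} (hr : 0 ≤ rows) (hc : 0 ≤ cols)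
    {P : PySem.Dict (Int × Int) (Int × Int)}
    (hUF : pvUFInv g rows cols (pvScan rows cols) P) :
    ∀ (l pre : List (Int × Int)) (D : PySem.Dict (Int × Int) (Int × Int × Int × Int)),
      pvScan rows cols = pre ++ l →
      D.items = (pre.filter (pvIsSeed g rows cols)).map
        (fun s => (pvFind P (pvFuel rows cols) s, pvT (pvPart g rows cols pre s))) →
      (l.foldl (fun bx q => pvBoxStep g (pvFuel rows cols) P bx q.1 q.2) D).items =
        ((pre ++ l).filter (pvIsSeed g rows cols)).map
          (fun s => (pvFind P (pvFuel rows cols) s, pvT (pvPart g rows cols (pre ++ l) s))) := by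
  have hclasses := pvB_classes g hr hc hUF
  intro l
  induction l with
  | nil => intro pre D _ hD; simpa using hD
  | cons q l' ih =>
      intro pre D hscan hD
      have hqmem : q ∈ pvScan rows cols := by rw [hscan]; simp
      have hqb := pv_mem_scan.mp hqmem
      have hpw := pv_scan_pairwise rows cols
      rw [hscan] at hpw
      have hprelt : ∀ a ∈ pre, pvLt a q := fun a ha =>
        (List.pairwise_append.mp hpw).2.2 a ha q List.mem_cons_self
      have hpost : ∀ a ∈ l', pvLt q a := fun a ha =>
        (List.pairwise_cons.mp (List.pairwise_append.mp hpw).2.1).1 a ha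
      have hprend : pre.Nodup := by
        have := pv_scan_nodup rows cols
        rw [hscan] at this
        exact this.of_append_left
      -- seeds collected so far have pairwise different roots
      have hseedgood : ∀ s, pvIsSeed g rows cols s = true → pvGood g rows cols s = true :=
        fun s hs => (pvIsSeed_iff.mp hs).1
      have hrootinj : ∀ s t, pvIsSeed g rows cols s = true → pvIsSeed g rows cols t = true →
          pvFind P (pvFuel rows cols) s = pvFind P (pvFuel rows cols) t → s = t := by
        intro s t hs ht hEq
        exact pv_seed_unique hr hc hs ht
          ((hclasses s t (hseedgood s hs) (hseedgood t ht)).mp hEq)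
      have hkeys : D.keys = (pre.filter (pvIsSeed g rows cols)).map
          (fun s => pvFind P (pvFuel rows cols) s) := by
        show D.items.map (·.1) = _
        rw [hD, List.map_map]
        rfl
      have hkeysnd : D.keys.Nodup := by
        rw [hkeys]
        refine List.Nodup.map_on ?_ (hprend.filter _)
        intro s hs t ht hEq
        exact hrootinj s t (List.of_mem_filter hs) (List.of_mem_filter ht) hEq
      simp only [List.foldl_cons]
      by_cases h5 : pvCell g q.1 q.2 = 5
      · have hq : pvGood g rows cols q = true := by
          simp only [pvGood, decide_eq_true_eq]
          exact ⟨hqb.1, hqb.2.1, hqb.2.2.1, hqb.2.2.2, h5⟩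
        by_cases hseed : pvIsSeed g rows cols q = true
        · -- a fresh component: its root is not yet a key
          have hnotkey : D.get? (pvFind P (pvFuel rows cols) (q.1, q.2)) = none := by
            rw [PySem.Dict.get?_eq_none_iff_not_mem_keys, hkeys]
            intro hmemk
            obtain ⟨s, hs, hEq⟩ := List.mem_map.mp hmemk
            have hsSeed := List.of_mem_filter hs
            have hspre := List.mem_of_mem_filter hs
            have hsq : q ∈ pvCompC g rows cols s :=
              (hclasses s q (hseedgood s hsSeed) hq).mp (by rw [hEq])
            have : s ∈ pvCompC g rows cols q := by
              rw [pv_compC_eq hr hc (hseedgood s hsSeed) hsq]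
              exact pv_self_mem_compC hr hc s
            exact (pvIsSeed_iff.mp hseed).2 s this (hprelt s hspre)
          have hstep : pvBoxStep g (pvFuel rows cols) P D q.1 q.2 =
              PySem.Dict.insert D (pvFind P (pvFuel rows cols) (q.1, q.2))
                (q.1, q.1, q.2, q.2) := by
            simp only [pvBoxStep, if_pos h5, hnotkey]
          rw [hstep]
          have hD' : (PySem.Dict.insert D (pvFind P (pvFuel rows cols) (q.1, q.2))
              (q.1, q.1, q.2, q.2)).items =
              ((pre ++ [q]).filter (pvIsSeed g rows cols)).map
                (fun s => (pvFind P (pvFuel rows cols) s,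
                  pvT (pvPart g rows cols (pre ++ [q]) s))) := by
            rw [PySem.Dict.items_insert_of_not_contains _ _
              ((PySem.Dict.get?_eq_none_iff_contains _ _).mp hnotkey), hD]
            rw [List.filter_append, List.map_append]
            congr 1
            · -- old components untouched: q is in none of them
              apply List.map_congr_left
              intro s hs
              have hsSeed := List.of_mem_filter hs
              have hspre := List.mem_of_mem_filter hs
              have hqns : q ∉ pvCompC g rows cols s := by
                intro hmem
                have : s ∈ pvCompC g rows cols q := by
                  rw [pv_compC_eq hr hc (hseedgood s hsSeed) hmem]
                  exact pv_self_mem_compC hr hc s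
                exact (pvIsSeed_iff.mp hseed).2 s this (hprelt s hspre)
              rw [pvPart_append, if_neg hqns]
            · -- the new component's box starts as q's singleton box
              simp only [List.filter_cons, List.filter_nil, hseed, if_pos, List.map_cons,
                List.map_nil]
              have hpartq : pvPart g rows cols (pre ++ [q]) q = ⟨q.1, q.1, q.2, q.2⟩ := by
                rw [pvPart_append, if_pos (pv_self_mem_compC hr hc q)]
                have hempty : pre.filter (fun x => decide (x ∈ pvCompC g rows cols q)) = [] := by
                  rw [List.filter_eq_nil_iff]
                  intro x hx hmem
                  simp only [decide_eq_true_eq] at hmem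
                  exact (pvIsSeed_iff.mp hseed).2 x hmem (hprelt x hx)
                rw [pvPart, hempty, List.foldl_nil, pvBoxAdd_self]
              rw [hpartq]
              rfl
          rw [show (pre ++ q :: l') = (pre ++ [q]) ++ l' by simp] at *
          exact ih (pre ++ [q]) _ hscan hD'
        · -- a known component: its seed m was scanned earlier
          obtain ⟨m, hmC, hmSeed, hmComp, hmlt⟩ := pv_exists_seed hr hc hq
          have hmq : pvLt m q := by
            rcases hmlt with rfl | h
            · exact absurd hmSeed (by simp [hseed])
            · exact h
          have hmpre : m ∈ pre := by
            have hmscan : m ∈ pvScan rows cols := by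
              rw [pv_mem_scan]
              have := hseedgood m hmSeed
              simp only [pvGood, decide_eq_true_eq] at this
              exact ⟨this.1, this.2.1, this.2.2.1, this.2.2.2.1⟩
            rw [hscan] at hmscan
            rcases List.mem_append.mp hmscan with h | h
            · exact h
            · rcases List.mem_cons.mp h with rfl | h'
              · exact absurd hmq (by rw [pvLt_iff]; omega)
              · exact absurd (hpost m h') (pvLt_asymm hmq)
          have hrootm : pvFind P (pvFuel rows cols) q = pvFind P (pvFuel rows cols) m :=
            (hclasses q m hq (hseedgood m hmSeed)).mpr hmC
          have hmitems : (pvFind P (pvFuel rows cols) m,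
              pvT (pvPart g rows cols pre m)) ∈ D.items := by
            rw [hD]
            exact List.mem_map.mpr ⟨m, List.mem_filter.mpr ⟨hmpre, hmSeed⟩, rfl⟩
          have hget : D.get? (pvFind P (pvFuel rows cols) (q.1, q.2)) =
              some ((pvPart g rows cols pre m).mnr, (pvPart g rows cols pre m).mxr,
                (pvPart g rows cols pre m).mnc, (pvPart g rows cols pre m).mxc) := by
            have := PySem.Dict.get?_of_mem_items _ hmitems hkeysnd
            rw [show ((q.1, q.2) : Int × Int) = q from rfl, hrootm]
            exact this
          have hstep : pvBoxStep g (pvFuel rows cols) P D q.1 q.2 =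
              PySem.Dict.insert D (pvFind P (pvFuel rows cols) (q.1, q.2))
                (min (pvPart g rows cols pre m).mnr q.1,
                 max (pvPart g rows cols pre m).mxr q.1,
                 min (pvPart g rows cols pre m).mnc q.2,
                 max (pvPart g rows cols pre m).mxc q.2) := by
            simp only [pvBoxStep, if_pos h5, hget]
          rw [hstep]
          have hcontains : D.contains (pvFind P (pvFuel rows cols) (q.1, q.2)) = true := by
            rcases Bool.eq_false_or_eq_true
              (D.contains (pvFind P (pvFuel rows cols) (q.1, q.2))) with h | h
            · exact h
            · rw [(PySem.Dict.get?_eq_none_iff_contains _ _).mpr h] at hget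
              cases hget
          have hD' : (PySem.Dict.insert D (pvFind P (pvFuel rows cols) (q.1, q.2))
              (min (pvPart g rows cols pre m).mnr q.1,
               max (pvPart g rows cols pre m).mxr q.1,
               min (pvPart g rows cols pre m).mnc q.2,
               max (pvPart g rows cols pre m).mxc q.2)).items =
              ((pre ++ [q]).filter (pvIsSeed g rows cols)).map
                (fun s => (pvFind P (pvFuel rows cols) s,
                  pvT (pvPart g rows cols (pre ++ [q]) s))) := by
            rw [PySem.Dict.items_insert_of_contains _ _ hcontains, hD, List.map_map]
            rw [List.filter_append]
            have hqnotseed : [q].filter (pvIsSeed g rows cols) = [] := by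
              simp [hseed]
            rw [hqnotseed, List.append_nil]
            apply List.map_congr_left
            intro s hs
            have hsSeed := List.of_mem_filter hs
            simp only [Function.comp_apply]
            by_cases hsm : s = m
            · subst hsm
              rw [show ((q.1, q.2) : Int × Int) = q from rfl, hrootm]
              simp only [beq_self_eq_true, if_pos]
              rw [pvPart_append, if_pos (by rw [hmComp]; exact pv_self_mem_compC hr hc q)]
              rw [pvT_add]
            · have hroots : pvFind P (pvFuel rows cols) s ≠
                  pvFind P (pvFuel rows cols) (q.1, q.2) := by
                rw [show ((q.1, q.2) : Int × Int) = q from rfl, hrootm]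
                intro hEq
                exact hsm (hrootinj s m hsSeed hmSeed hEq)
              have hqns : q ∉ pvCompC g rows cols s := by
                intro hmem
                apply hroots
                rw [show ((q.1, q.2) : Int × Int) = q from rfl]
                exact (hclasses s q (hseedgood s hsSeed) hq).mpr hmem
              rw [pvPart_append, if_neg hqns]
              simp only [beq_iff_eq, if_neg hroots]
          rw [show (pre ++ q :: l') = (pre ++ [q]) ++ l' by simp] at *
          exact ih (pre ++ [q]) _ hscan hD'
      · -- not a 5-cell: nothing happens, q belongs to no component
        have hstep : pvBoxStep g (pvFuel rows cols) P D q.1 q.2 = D := by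
          simp only [pvBoxStep, if_neg h5]
        rw [hstep]
        have hqnotgood : pvGood g rows cols q ≠ true := by
          intro h
          simp only [pvGood, decide_eq_true_eq] at h
          exact h5 h.2.2.2.2
        have hD' : D.items = ((pre ++ [q]).filter (pvIsSeed g rows cols)).map
            (fun s => (pvFind P (pvFuel rows cols) s,
              pvT (pvPart g rows cols (pre ++ [q]) s))) := by
          rw [hD, List.filter_append]
          have hqseedfalse : ¬ (pvIsSeed g rows cols q = true) := fun hcon =>
            hqnotgood (pvIsSeed_iff.mp hcon).1
          have : [q].filter (pvIsSeed g rows cols) = [] := by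
            simp only [List.filter_cons, List.filter_nil]
            rw [if_neg hqseedfalse]
          rw [this, List.append_nil]
          apply List.map_congr_left
          intro s hs
          have hsSeed := List.of_mem_filter hs
          have hqns : q ∉ pvCompC g rows cols s := by
            intro hmem
            exact hqnotgood (pv_compC_good hr hc (hseedgood s hsSeed) hmem)
          rw [pvPart_append, if_neg hqns]
        rw [show (pre ++ q :: l') = (pre ++ [q]) ++ l' by simp] at *
        exact ih (pre ++ [q]) _ hscan hD'

-- ---------- assembling B ----------

lemma pvPart_scan (g : List (List Int)) {rows cols : Int} (hr : 0 ≤ rows) (hc : 0 ≤ cols)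
    {s : Int × Int} (hs : pvGood g rows cols s = true) :
    pvPart g rows cols (pvScan rows cols) s = pvBoxCC g rows cols s := by
  unfold pvPart pvBoxCC
  apply pv_foldl_box_perm
  apply List.perm_of_nodup_nodup_toFinset_eq
  · exact (pv_scan_nodup rows cols).filter _
  · exact Finset.nodup_toList _
  · rw [Finset.toList_toFinset]
    ext z
    simp only [List.mem_toFinset, List.mem_filter, decide_eq_true_eq]
    constructor
    · rintro ⟨_, h⟩; exact h
    · intro h
      refine ⟨?_, h⟩
      have hzg := pv_compC_good hr hc hs h
      rw [pv_mem_scan]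
      simp only [pvGood, decide_eq_true_eq] at hzg
      exact ⟨hzg.1, hzg.2.1, hzg.2.2.1, hzg.2.2.2.1⟩

lemma pvB_eq_target (grid : List (List Int)) :
    solve_bb43febb_alt grid =
      (pvBoxes grid (PySem.List.len grid)
        (PySem.List.len (PySem.List.pyGetD grid 0 []))).foldl
        (fun o b => pvFillBox o b.mnr b.mxr b.mnc b.mxc) grid := by
  have hr : (0 : Int) ≤ PySem.List.len grid := by
    rw [PySem.List.len_eq]; exact Int.natCast_nonneg _
  have hc : (0 : Int) ≤ PySem.List.len (PySem.List.pyGetD grid 0 []) := by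
    rw [PySem.List.len_eq]; exact Int.natCast_nonneg _
  unfold solve_bb43febb_alt
  simp only [List.map_id']
  rw [pv_scan_foldl, pv_scan_foldl]
  rw [show ((PySem.List.len grid * PySem.List.len (PySem.List.pyGetD grid 0 [])).toNat + 1) =
    pvFuel (PySem.List.len grid) (PySem.List.len (PySem.List.pyGetD grid 0 [])) from rfl]
  have hUF : pvUFInv grid (PySem.List.len grid) (PySem.List.len (PySem.List.pyGetD grid 0 []))
      (pvScan (PySem.List.len grid) (PySem.List.len (PySem.List.pyGetD grid 0 [])))
      ((pvScan (PySem.List.len grid) (PySem.List.len (PySem.List.pyGetD grid 0 []))).foldl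
        (fun par q =>
          if pvCell grid q.1 q.2 = 5 then
            [((q.1 : Int), q.2 + 1), (q.1 + 1, (q.2 : Int))].foldl
              (pvUnionStep grid (PySem.List.len grid)
                (PySem.List.len (PySem.List.pyGetD grid 0 []))
                (pvFuel (PySem.List.len grid) (PySem.List.len (PySem.List.pyGetD grid 0 [])))
                q.1 q.2) par
          else par) PySem.Dict.empty) := by
    have hinit : pvUFInv grid (PySem.List.len grid)
        (PySem.List.len (PySem.List.pyGetD grid 0 [])) [] PySem.Dict.empty := by
      refine ⟨⟨PySem.Dict.nodup_keys_empty, ?_⟩, by simp⟩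
      intro k v h
      rw [PySem.Dict.get?_empty] at h
      cases h
    have := pvB_pass1 grid hr hc
      (pvScan (PySem.List.len grid) (PySem.List.len (PySem.List.pyGetD grid 0 []))) []
      PySem.Dict.empty (by simp) hinit
    simpa using this
  have hD := pvB_pass2 grid hr hc hUF
    (pvScan (PySem.List.len grid) (PySem.List.len (PySem.List.pyGetD grid 0 []))) []
    PySem.Dict.empty (by simp) (by simp [PySem.Dict.empty])
  simp only [List.nil_append] at hD
  -- read the values off the final dict and fill the boxes
  show (PySem.Dict.values _).foldl _ grid = _
  rw [PySem.Dict.values, hD, List.map_map, List.foldl_map]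
  rw [pvBoxes, List.foldl_map]
  apply PySem.List.foldl_congr_mem
  intro acc s hs
  have hsg : pvGood grid (PySem.List.len grid)
      (PySem.List.len (PySem.List.pyGetD grid 0 [])) s = true :=
    (pvIsSeed_iff.mp (List.of_mem_filter hs)).1
  rw [show ((fun p => p.2) ∘ fun s => (pvFind _ _ s, pvT (pvPart grid _ _ _ s))) s =
    pvT (pvPart grid (PySem.List.len grid) (PySem.List.len (PySem.List.pyGetD grid 0 []))
      (pvScan (PySem.List.len grid) (PySem.List.len (PySem.List.pyGetD grid 0 []))) s) from rfl]
  rw [pvPart_scan grid hr hc hsg]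
  rfl

-- ===== VERDICT (by name: the statement is the Claim_ definition above) =====
theorem solve_bb43febb_spec : Claim_equal_solve_bb43febb := by
  unfold Claim_equal_solve_bb43febb
  intro grid _ _
  unfold Spec_solve_bb43febb
  rw [pvA_eq_target, pvB_eq_target]
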